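-- pv_equiv track=rewrite | github.com/porciuscato/study_algorithm | coding_test/마이다스아이티/200523/p3.py | solve
-- ===== SOURCE A (Python) =====
-- def solve(hammer, board, length):
--     result = 0
--     hr = hammer[0]
--     hc = hammer[1]
--     # 복사
--     copied = [[0] * length for _ in range(length)]
--     for rr in range(length):
--         for cc in range(length):
--             copied[rr][cc] = board[rr][cc]
--
--     # 망치로 깨부수기
--     result += 1
--     while hr > 0:
--         copied[hr][hc] = copied[hr - 1][hc]
--         hr -= 1
--     copied[hr][hc] = 0
--
--     flag = True
--     while flag:
--         flag = False
--         crushed = [[0] * length for _ in range(length)]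
--         # 가로로 탐색 -> 1로 바꾼다
--         for r1 in range(length):
--             for c1 in range(length - 2):
--                 if crushed[r1][c1] != 1 and copied[r1][c1]:
--                     start = c1
--                     pos = c1
--                     point = copied[r1][c1]
--                     size = 0
--                     while pos < length and copied[r1][pos] == point:
--                         pos += 1
--                         size += 1
--                     if size >= 3:
--                         flag = True
--                         for cru in range(start, start + size):
--                             crushed[r1][cru] = 1
--         # 세로로 탐색 -> 2로 바꾼다
--         for c2 in range(length):
--             for r2 in range(length - 2):
--                 if crushed[r2][c2] != 2 and copied[r2][c2]:
--                     start = r2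
--                     pos = r2
--                     point = copied[r2][c2]
--                     size = 0
--                     while pos < length and copied[pos][c2] == point:
--                         pos += 1
--                         size += 1
--                     if size >= 3:
--                         flag = True
--                         for cru in range(start, start + size):
--                             crushed[cru][c2] = 2
--         if flag:
--             # 터트리기
--             for r3 in range(length):
--                 for c3 in range(length):
--                     if crushed[r3][c3]:
--                         copied[r3][c3] = 0
--                         result += 1
--
--             # 이동 / 아래서부터 이동 / 터지면 0이 된다.
--             b_c = 0
--             while b_c < length:
--                 origin = length - 1
--                 while origin > 0:
--                     b_r = origin
--                     if copied[origin][b_c] == 0: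
--                         while b_r >= 0 and not copied[b_r][b_c]:
--                             b_r -= 1
--                     if b_r >= 0:
--                         copied[b_r][b_c], copied[origin][b_c] = copied[origin][b_c], copied[b_r][b_c]
--                         origin -= 1
--                     else:
--                         break
--                 b_c += 1
--     return result
-- ===== SOURCE B (Python) =====
-- def solve(hammer, board, length):
--     n = length
--     hr, hc = hammer[0], hammer[1]
--     g = [list(board[r][:n]) for r in range(n)]
--
--     # hammer: the struck cell disappears, the cells above it slide down one row
--     while hr > 0:
--         g[hr][hc] = g[hr - 1][hc]
--         hr -= 1
--     g[hr][hc] = 0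
--
--     result = 1
--     while True:
--         # a cell is destroyed iff it is nonzero and lies in a maximal
--         # horizontal or vertical run of equal values of length >= 3
--         destroyed = [[_dest(g, n, r, c) for c in range(n)] for r in range(n)]
--         cnt = sum(row.count(True) for row in destroyed)
--         if cnt == 0:
--             return result
--         result += cnt
--         for r in range(n):
--             for c in range(n):
--                 if destroyed[r][c]:
--                     g[r][c] = 0
--         # gravity: each column becomes zeros on top, survivors below
--         for c in range(n):
--             keep = [g[r][c] for r in range(n) if g[r][c] != 0]
--             z = n - len(keep)
--             for r in range(n):
--                 g[r][c] = 0 if r < z else keep[r - z]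
--
--
-- def _dest(g, n, r, c):
--     v = g[r][c]
--     if v == 0:
--         return False
--     a = c
--     while a > 0 and g[r][a - 1] == v:
--         a -= 1
--     b = c
--     while b + 1 < n and g[r][b + 1] == v:
--         b += 1
--     if b - a + 1 >= 3:
--         return True
--     a = r
--     while a > 0 and g[a - 1][c] == v:
--         a -= 1
--     b = r
--     while b + 1 < n and g[b + 1][c] == v:
--         b += 1
--     return b - a + 1 >= 3
-- ===== Notes on version B (the rewrite author's own statement) =====
-- stated objective: alternative
-- what changed: B replaces A's mark-grid cascade (per-start run rescans with 1/2 skip marks, a separate crush-and-count sweep, and swap-bubbling gravity) by a per-cell local test (a cell dies iff it is nonzero and its maximal horizontal or vertical run of equal values has length >= 3), a direct count of the destroyed mask, and column rebuilding for gravity (zeros on top, survivors below); the short hammer prologue is kept.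
import Mathlib
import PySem

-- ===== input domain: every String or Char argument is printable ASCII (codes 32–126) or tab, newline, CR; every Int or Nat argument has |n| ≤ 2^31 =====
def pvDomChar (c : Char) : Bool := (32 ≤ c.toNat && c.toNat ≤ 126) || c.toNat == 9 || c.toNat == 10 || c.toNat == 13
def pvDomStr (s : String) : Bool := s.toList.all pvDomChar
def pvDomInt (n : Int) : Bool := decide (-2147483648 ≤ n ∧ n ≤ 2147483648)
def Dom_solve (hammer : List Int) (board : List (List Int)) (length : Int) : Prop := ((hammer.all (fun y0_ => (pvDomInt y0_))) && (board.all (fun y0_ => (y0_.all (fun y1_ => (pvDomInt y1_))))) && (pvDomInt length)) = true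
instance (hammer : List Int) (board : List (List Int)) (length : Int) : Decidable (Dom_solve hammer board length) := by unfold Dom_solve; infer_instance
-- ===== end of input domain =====

-- B re-implements the match-3 cascade with a per-cell maximal-run test, a destroyed mask,
-- and column rebuilding for gravity, instead of A's skip-marked run rescans with a 1/2 mark
-- grid, a separate crush-and-count sweep, and swap-bubbling gravity; same cost class, no
-- speed claim.  Neither implementation mutates its arguments.

-- ===== PORT A =====
-- shared 2-D cell access (Python's g[r][c] read / write; on Pre_ inputs every index is in range,
-- so the getD defaults are never the result of an out-of-range Python access)
def gg {α : Type} (d : α) (g : List (List α)) (r c : Nat) : α := (g.getD r []).getD c d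

def gs {α : Type} (g : List (List α)) (r c : Nat) (v : α) : List (List α) :=
  g.set r ((g.getD r []).set c v)

-- A's inner `while pos < length and copied[..][pos] == point` run counter
def runA (f : Nat → Int) (n : Nat) (point : Int) (pos : Nat) : Nat :=
  if h : pos < n ∧ f pos = point then runA f n point (pos + 1) + 1 else 0
termination_by n - pos
decreasing_by omega

-- A's `while b_r >= 0 and not copied[b_r][b_c]: b_r -= 1`
def scanUpA (f : Nat → Int) (b_r : Int) : Int :=
  if h : 0 ≤ b_r ∧ f b_r.toNat = 0 then scanUpA f (b_r - 1) else b_r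
termination_by (b_r + 1).toNat
decreasing_by omega

-- A's `while hr > 0: copied[hr][hc] = copied[hr-1][hc]; hr -= 1`
def hammerA (g : List (List Int)) (hr hc : Nat) : List (List Int) :=
  match hr with
  | 0 => g
  | h + 1 => hammerA (gs g (h + 1) hc (gg 0 g h hc)) h hc

-- `for cru in range(start, start+size): crushed[r1][cru] = 1`
def markRowA (cr : List (List Nat)) (r start size : Nat) : List (List Nat) :=
  (List.range' start size).foldl (fun cr cru => gs cr r cru 1) cr

-- `for cru in range(start, start+size): crushed[cru][c2] = 2`
def markColA (cr : List (List Nat)) (c start size : Nat) : List (List Nat) :=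
  (List.range' start size).foldl (fun cr cru => gs cr cru c 2) cr

-- horizontal sweep (marks 1, skips already-1 starts)
def horizA (g : List (List Int)) (n : Nat) : Bool × List (List Nat) :=
  (List.range n).foldl (fun st r1 =>
    (List.range (n - 2)).foldl (fun st c1 =>
      if gg 0 st.2 r1 c1 ≠ 1 ∧ gg 0 g r1 c1 ≠ 0 then
        let point := gg 0 g r1 c1
        let size := runA (fun cc => gg 0 g r1 cc) n point c1
        if 3 ≤ size then (true, markRowA st.2 r1 c1 size) else st
      else st) st)
    (false, List.replicate n (List.replicate n 0))

-- vertical sweep (marks 2, skips already-2 starts)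
def vertA (g : List (List Int)) (n : Nat) (st0 : Bool × List (List Nat)) : Bool × List (List Nat) :=
  (List.range n).foldl (fun st c2 =>
    (List.range (n - 2)).foldl (fun st r2 =>
      if gg 0 st.2 r2 c2 ≠ 2 ∧ gg 0 g r2 c2 ≠ 0 then
        let point := gg 0 g r2 c2
        let size := runA (fun rr => gg 0 g rr c2) n point r2
        if 3 ≤ size then (true, markColA st.2 c2 r2 size) else st
      else st) st) st0

-- `for r3 ... for c3 ...: if crushed[r3][c3]: copied[r3][c3] = 0; result += 1`
def crushCountA (g : List (List Int)) (cr : List (List Nat)) (n : Nat) (result : Int) :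
    List (List Int) × Int :=
  (List.range n).foldl (fun p r3 =>
    (List.range n).foldl (fun p c3 =>
      if gg 0 cr r3 c3 ≠ 0 then (gs p.1 r3 c3 0, p.2 + 1) else p) p) (g, result)

-- the `while origin > 0` gravity loop of one column b_c
def gravColA (g : List (List Int)) (b_c : Nat) (origin : Nat) : List (List Int) :=
  match origin with
  | 0 => g
  | o + 1 =>
    let b_r : Int :=
      if gg 0 g (o + 1) b_c = 0 then scanUpA (fun i => gg 0 g i b_c) ((o : Int) + 1)
      else (o : Int) + 1
    if 0 ≤ b_r then
      gravColA (gs (gs g b_r.toNat b_c (gg 0 g (o + 1) b_c)) (o + 1) b_c (gg 0 g b_r.toNat b_c))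
        b_c o
    else g

-- `b_c` loop over the columns
def gravA (g : List (List Int)) (n : Nat) : List (List Int) :=
  (List.range n).foldl (fun g b_c => gravColA g b_c (n - 1)) g

-- the `while flag` cascade; fuel n*n+1 passes suffices since every flagged pass zeroes a cell
def loopA (n : Nat) (fuel : Nat) (g : List (List Int)) (result : Int) : Int :=
  match fuel with
  | 0 => result
  | fuel + 1 =>
    let st := vertA g n (horizA g n)
    if st.1 then
      let p := crushCountA g st.2 n result
      loopA n fuel (gravA p.1 n) p.2
    else result

def solve (hammer : List Int) (board : List (List Int)) (length : Int) : Int :=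
  let n := length.toNat
  -- hc with Python's negative-index wraparound; the while-loop runs hammer[0] times
  -- (never for hammer[0] ≤ 0), and the final `copied[hr][hc] = 0` lands on the wrapped
  -- final value of hr (0 if the loop ran, else hammer[0] itself)
  let hc := (if hammer.getD 1 0 < 0 then hammer.getD 1 0 + length else hammer.getD 1 0).toNat
  let copied := (List.range n).foldl (fun g rr =>
    (List.range n).foldl (fun g cc => gs g rr cc (gg 0 board rr cc)) g)
    (List.replicate n (List.replicate n 0))
  let copied := gs (hammerA copied (hammer.getD 0 0).toNat hc)
    (if 0 < hammer.getD 0 0 then 0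
     else (if hammer.getD 0 0 < 0 then hammer.getD 0 0 + length else hammer.getD 0 0).toNat)
    hc 0
  loopA n (n * n + 1) copied 1

-- ===== PORT B =====
-- Source B's `while a > 0 and row[a-1] == v: a -= 1`
def goLeftB (f : Nat → Int) (v : Int) (a : Nat) : Nat :=
  if h : 0 < a ∧ f (a - 1) = v then goLeftB f v (a - 1) else a
termination_by a
decreasing_by omega

-- Source B's `while b + 1 < n and row[b+1] == v: b += 1`
def goRightB (f : Nat → Int) (n : Nat) (v : Int) (b : Nat) : Nat :=
  if h : b + 1 < n ∧ f (b + 1) = v then goRightB f n v (b + 1) else b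
termination_by n - b
decreasing_by omega

-- Source B's _dest: nonzero and inside a maximal run of length >= 3 (row, else column)
def destB (g : List (List Int)) (n : Nat) (r c : Nat) : Bool :=
  let v := gg 0 g r c
  if v = 0 then false
  else
    let a := goLeftB (fun x => gg 0 g r x) v c
    let b := goRightB (fun x => gg 0 g r x) n v c
    if 3 ≤ b - a + 1 then true
    else
      let a2 := goLeftB (fun x => gg 0 g x c) v r
      let b2 := goRightB (fun x => gg 0 g x c) n v r
      decide (3 ≤ b2 - a2 + 1)

-- Source B's `while True` cascade (same fuel device as loopA; fuel 0 returns the current result)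
def loopB (n : Nat) (fuel : Nat) (g : List (List Int)) (result : Int) : Int :=
  match fuel with
  | 0 => result
  | fuel + 1 =>
    let destroyed := (List.range n).map (fun r => (List.range n).map (fun c => destB g n r c))
    let cnt : Nat := (destroyed.map (fun row => row.count true)).sum
    if cnt = 0 then result
    else
      let g1 := (List.range n).foldl (fun g r =>
        (List.range n).foldl (fun g c => if gg false destroyed r c then gs g r c 0 else g) g) g
      let g2 := (List.range n).foldl (fun g c =>
        let keep := ((List.range n).map (fun r => gg 0 g r c)).filter (fun x => x ≠ 0)
        let z := n - keep.length
        (List.range n).foldl (fun g r => gs g r c (if r < z then 0 else keep.getD (r - z) 0)) g) g1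
      loopB n fuel g2 (result + (cnt : Int))

def solve_alt (hammer : List Int) (board : List (List Int)) (length : Int) : Int :=
  let n := length.toNat
  -- hc with Python's negative-index wraparound; the hammer while-loop and the final
  -- `g[hr][hc] = 0` are ported exactly as in solve (Source B keeps A's hammer prologue)
  let hc := (if hammer.getD 1 0 < 0 then hammer.getD 1 0 + length else hammer.getD 1 0).toNat
  let g := (List.range n).map (fun r => (board.getD r []).take n)
  let g := gs (hammerA g (hammer.getD 0 0).toNat hc)
    (if 0 < hammer.getD 0 0 then 0
     else (if hammer.getD 0 0 < 0 then hammer.getD 0 0 + length else hammer.getD 0 0).toNat)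
    hc 0
  loopB n (n * n + 1) g 1

-- ===== PRECONDITION & SPEC =====
-- Pre_ is exactly where the Python A returns normally: a square length×length board actually
-- present in `board`, and hammer coordinates in [-length, length) (Python wraps negative
-- indices).  Excluded inputs are those where A raises IndexError (length < 1, hammer shorter
-- than 2, board smaller than length, hammer coordinates outside [-length, length)).
def Pre_solve (hammer : List Int) (board : List (List Int)) (length : Int) : Prop :=
  1 ≤ length ∧ 2 ≤ hammer.length ∧
  -length ≤ hammer.getD 0 0 ∧ hammer.getD 0 0 < length ∧
  -length ≤ hammer.getD 1 0 ∧ hammer.getD 1 0 < length ∧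
  length.toNat ≤ board.length ∧ ∀ row ∈ board.take length.toNat, length.toNat ≤ row.length

instance (hammer : List Int) (board : List (List Int)) (length : Int) :
    Decidable (Pre_solve hammer board length) := by unfold Pre_solve; infer_instance

def pvWitness_solve : List Int × List (List Int) × Int := ([0, 1], [[3, 3, 3], [1, 2, 1], [2, 1, 2]], 3)

def Spec_solve (hammer : List Int) (board : List (List Int)) (length : Int) (out : Int) : Prop :=
  out = solve_alt hammer board length
instance (hammer : List Int) (board : List (List Int)) (length : Int) (out : Int) :
    Decidable (Spec_solve hammer board length out) := by unfold Spec_solve; infer_instance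

-- ===== CLAIM (what is proved, stated in full; the proofs are below) =====
def Claim_equal_solve : Prop := ∀ (hammer : List Int) (board : List (List Int)) (length : Int),
  Dom_solve hammer board length → Pre_solve hammer board length →
  Spec_solve hammer board length (solve hammer board length)

-- ===== LEMMAS AND PROOFS =====

-- ---------- grid basics ----------
def ShapeG {α : Type} (g : List (List α)) (n : Nat) : Prop :=
  g.length = n ∧ ∀ row ∈ g, row.length = n

theorem getD_set_self {α : Type} (l : List α) (i : Nat) (a d : α) (h : i < l.length) :
    (l.set i a).getD i d = a := by
  rw [List.getD_eq_getElem?_getD, List.getElem?_set_self h, Option.getD_some]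

theorem getD_set_ne {α : Type} (l : List α) (i j : Nat) (a d : α) (h : i ≠ j) :
    (l.set i a).getD j d = l.getD j d := by
  rw [List.getD_eq_getElem?_getD, List.getElem?_set_ne h, ← List.getD_eq_getElem?_getD]

theorem getD_row {α : Type} {g : List (List α)} {n : Nat} (hs : ShapeG g n) {r : Nat}
    (hr : r < n) : (g.getD r []).length = n := by
  have hl := hs.1
  have hrl : r < g.length := by omega
  rw [List.getD_eq_getElem _ _ hrl]
  exact hs.2 _ (List.getElem_mem hrl)

theorem shape_gs {α : Type} {g : List (List α)} {n : Nat} (h : ShapeG g n) (r c : Nat) (v : α) :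
    ShapeG (gs g r c v) n := by
  have hl := h.1
  by_cases hrl : r < g.length
  · refine ⟨by simp [gs, h.1], ?_⟩
    intro row hrow
    rcases List.mem_or_eq_of_mem_set hrow with hm | hm
    · exact h.2 _ hm
    · subst hm
      rw [List.length_set, getD_row h (by omega)]
  · rw [gs, List.set_eq_of_length_le (by omega)]
    exact h

theorem gg_gs_same {α : Type} (d : α) {g : List (List α)} {n : Nat} (hs : ShapeG g n)
    {r c : Nat} (hr : r < n) (hc : c < n) (v : α) : gg d (gs g r c v) r c = v := by
  have hrl : r < g.length := by have := hs.1; omega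
  have hcl : c < (g.getD r []).length := by rw [getD_row hs hr]; omega
  unfold gg gs
  rw [getD_set_self _ _ _ _ hrl, getD_set_self _ _ _ _ hcl]

theorem gg_gs_ne {α : Type} (d : α) (g : List (List α)) {r c r' c' : Nat} (v : α)
    (h : r' ≠ r ∨ c' ≠ c) : gg d (gs g r c v) r' c' = gg d g r' c' := by
  by_cases hrr : r' = r
  · subst hrr
    have hcc : c ≠ c' := fun hx => (h.resolve_left (by simp)) hx.symm
    by_cases hlen : r' < g.length
    · unfold gg gs
      rw [getD_set_self _ _ _ _ hlen, getD_set_ne _ _ _ _ _ hcc]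
    · rw [gs, List.set_eq_of_length_le (by omega)]
  · unfold gg gs
    rw [getD_set_ne _ _ _ _ _ (fun hx => hrr hx.symm)]

theorem grid_ext {α : Type} (d : α) {g g' : List (List α)} {n : Nat}
    (hg : ShapeG g n) (hg' : ShapeG g' n)
    (h : ∀ r c, r < n → c < n → gg d g r c = gg d g' r c) : g = g' := by
  have hgl := hg.1
  have hg'l := hg'.1
  apply List.ext_getElem (by omega)
  intro r h1 h2
  have hrn : r < n := by omega
  have e1 : g[r].length = n := hg.2 _ (List.getElem_mem h1)
  have e2 : g'[r].length = n := hg'.2 _ (List.getElem_mem h2)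
  apply List.ext_getElem (by omega)
  intro c hc1 hc2
  have hcn : c < n := by omega
  have hh := h r c hrn hcn
  unfold gg at hh
  rw [List.getD_eq_getElem _ _ h1, List.getD_eq_getElem _ _ h2,
      List.getD_eq_getElem _ _ hc1, List.getD_eq_getElem _ _ hc2] at hh
  exact hh


-- ---------- run / scan characterizations ----------
theorem runA_pos_eq (f : Nat → Int) {n : Nat} {v : Int} {pos : Nat}
    (h : pos < n ∧ f pos = v) : runA f n v pos = runA f n v (pos + 1) + 1 := by
  rw [runA]; simp [h]

theorem runA_stop (f : Nat → Int) {n : Nat} {v : Int} {pos : Nat}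
    (h : ¬(pos < n ∧ f pos = v)) : runA f n v pos = 0 := by
  rw [runA]; simp only [dif_neg h]

theorem runA_mem (f : Nat → Int) (n : Nat) (v : Int) :
    ∀ i pos, i < runA f n v pos → pos + i < n ∧ f (pos + i) = v := by
  intro i
  induction i with
  | zero =>
    intro pos h
    by_cases hc : pos < n ∧ f pos = v
    · simpa using hc
    · rw [runA_stop f hc] at h; omega
  | succ k ih =>
    intro pos h
    by_cases hc : pos < n ∧ f pos = v
    · rw [runA_pos_eq f hc] at h
      have := ih (pos + 1) (by omega)
      rw [show pos + (k + 1) = pos + 1 + k by omega]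
      exact this
    · rw [runA_stop f hc] at h; omega

theorem runA_add_le (f : Nat → Int) {n : Nat} {v : Int} {pos : Nat} (h : pos ≤ n) :
    pos + runA f n v pos ≤ n := by
  rcases Nat.eq_zero_or_pos (runA f n v pos) with h0 | h0
  · omega
  · have := (runA_mem f n v (runA f n v pos - 1) pos (by omega)).1
    omega

theorem runA_shift (f : Nat → Int) (n : Nat) (v : Int) :
    ∀ k pos, k ≤ runA f n v pos → runA f n v (pos + k) = runA f n v pos - k := by
  intro k
  induction k with
  | zero => intro pos _; simp
  | succ k ih =>
    intro pos h
    by_cases hc : pos < n ∧ f pos = v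
    · rw [runA_pos_eq f hc] at h ⊢
      rw [show pos + (k + 1) = pos + 1 + k by omega, ih (pos + 1) (by omega)]
      omega
    · rw [runA_stop f hc] at h; omega

theorem runA_eq_of (f : Nat → Int) {n : Nat} {v : Int} :
    ∀ a e, a ≤ e → e < n → (∀ i, a ≤ i → i ≤ e → f i = v) →
      (e + 1 = n ∨ f (e + 1) ≠ v) → runA f n v a = e + 1 - a := by
  intro a e
  induction h : e - a generalizing a with
  | zero =>
    intro hae he hall hstop
    have hea : a = e := by omega
    subst hea
    rw [runA_pos_eq f ⟨he, hall a le_rfl le_rfl⟩, runA_stop]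
    · omega
    · rcases hstop with h1 | h1
      · omega
      · intro hx; exact h1 hx.2
  | succ k ih =>
    intro hae he hall hstop
    rw [runA_pos_eq f ⟨by omega, hall a le_rfl (by omega)⟩,
      ih (a + 1) (by omega) (by omega) he (fun i hi1 hi2 => hall i (by omega) hi2) hstop]
    omega

-- the left/right maximal-run scans of B
theorem goLeftB_le (f : Nat → Int) (v : Int) : ∀ a, goLeftB f v a ≤ a := by
  intro a
  induction a using Nat.strong_induction_on with
  | _ a ih =>
    rw [goLeftB]
    by_cases h : 0 < a ∧ f (a - 1) = v
    · simp only [dif_pos h]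
      have := ih (a - 1) (by omega)
      omega
    · simp [dif_neg h]

theorem goLeftB_all (f : Nat → Int) (v : Int) :
    ∀ a i, goLeftB f v a ≤ i → i < a → f i = v := by
  intro a
  induction a using Nat.strong_induction_on with
  | _ a ih =>
    intro i h1 h2
    rw [goLeftB] at h1
    by_cases h : 0 < a ∧ f (a - 1) = v
    · simp only [dif_pos h] at h1
      rcases Nat.lt_or_ge i (a - 1) with hlt | hge
      · exact ih (a - 1) (by omega) i h1 hlt
      · have : i = a - 1 := by omega
        subst this; exact h.2
    · simp only [dif_neg h] at h1; omega

theorem goLeftB_min (f : Nat → Int) (v : Int) :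
    ∀ a s, s ≤ a → (∀ i, s ≤ i → i < a → f i = v) → goLeftB f v a ≤ s := by
  intro a
  induction a using Nat.strong_induction_on with
  | _ a ih =>
    intro s hs hall
    rcases Nat.eq_or_lt_of_le hs with he | hlt
    · subst he; exact goLeftB_le f v s
    · rw [goLeftB, dif_pos ⟨by omega, hall (a - 1) (by omega) (by omega)⟩]
      exact ih (a - 1) (by omega) s (by omega) (fun i h1 h2 => hall i h1 (by omega))

theorem goRightB_lt (f : Nat → Int) (n : Nat) (v : Int) :
    ∀ b, b < n → goRightB f n v b < n := by
  intro b
  induction h : n - b using Nat.strong_induction_on generalizing b with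
  | _ k ih =>
    intro hb
    rw [goRightB]
    by_cases hc : b + 1 < n ∧ f (b + 1) = v
    · simp only [dif_pos hc]
      exact ih (n - (b + 1)) (by omega) (b + 1) rfl (by omega)
    · simpa [dif_neg hc] using hb

theorem goRightB_ge (f : Nat → Int) (n : Nat) (v : Int) : ∀ b, b ≤ goRightB f n v b := by
  intro b
  induction h : n - b using Nat.strong_induction_on generalizing b with
  | _ k ih =>
    rw [goRightB]
    by_cases hc : b + 1 < n ∧ f (b + 1) = v
    · simp only [dif_pos hc]
      have := ih (n - (b + 1)) (by omega) (b + 1) rfl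
      omega
    · simp [dif_neg hc]

theorem goRightB_all (f : Nat → Int) (n : Nat) (v : Int) :
    ∀ b i, b < i → i ≤ goRightB f n v b → f i = v := by
  intro b
  induction h : n - b using Nat.strong_induction_on generalizing b with
  | _ k ih =>
    intro i h1 h2
    rw [goRightB] at h2
    by_cases hc : b + 1 < n ∧ f (b + 1) = v
    · simp only [dif_pos hc] at h2
      rcases Nat.lt_or_ge (b + 1) i with hlt | hge
      · exact ih (n - (b + 1)) (by omega) (b + 1) rfl i hlt h2
      · have : i = b + 1 := by omega
        subst this; exact hc.2
    · simp only [dif_neg hc] at h2; omega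

theorem goRightB_stop (f : Nat → Int) (n : Nat) (v : Int) (b : Nat) :
    goRightB f n v b + 1 ≥ n ∨ f (goRightB f n v b + 1) ≠ v := by
  induction h : n - b using Nat.strong_induction_on generalizing b with
  | _ k ih =>
    rw [goRightB]
    by_cases hc : b + 1 < n ∧ f (b + 1) = v
    · simp only [dif_pos hc]; exact ih (n - (b + 1)) (by omega) (b + 1) rfl
    · simp only [dif_neg hc]
      rcases Decidable.not_and_iff_not_or_not.mp hc with h1 | h1
      · left; omega
      · right; exact h1

theorem goRightB_max (f : Nat → Int) (n : Nat) (v : Int) :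
    ∀ b e, b ≤ e → e < n → (∀ i, b < i → i ≤ e → f i = v) → e ≤ goRightB f n v b := by
  intro b e
  induction h : e - b generalizing b with
  | zero =>
    intro h1 h2 _
    have heb : b = e := by omega
    rw [← heb]; exact goRightB_ge f n v b
  | succ k ih =>
    intro h1 h2 hall
    rw [goRightB, dif_pos ⟨by omega, hall (b + 1) (by omega) (by omega)⟩]
    exact ih (b + 1) (by omega) (by omega) h2 (fun i hi1 hi2 => hall i (by omega) hi2)

-- the per-cell semantic predicate: c lies in some run of length ≥ 3 of a nonzero value
def HM (f : Nat → Int) (n c : Nat) : Prop :=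
  ∃ s, s ≤ c ∧ c < s + runA f n (f s) s ∧ f s ≠ 0 ∧ 3 ≤ runA f n (f s) s

theorem HM_ne_zero {f : Nat → Int} {n c : Nat} (h : HM f n c) : f c ≠ 0 := by
  obtain ⟨s, h1, h2, h3, _⟩ := h
  have := (runA_mem f n (f s) (c - s) s (by omega)).2
  rw [show s + (c - s) = c by omega] at this
  rw [this]; exact h3

theorem bridgeB (f : Nat → Int) {n c : Nat} (hc : c < n) (hv : f c ≠ 0) :
    (3 ≤ goRightB f n (f c) c - goLeftB f (f c) c + 1) ↔ HM f n c := by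
  constructor
  · intro h3
    set v := f c with hv'
    set a := goLeftB f v c with ha
    set b := goRightB f n v c with hb
    have hal : a ≤ c := goLeftB_le f v c
    have hbl : c ≤ b := goRightB_ge f n v c
    have hbn : b < n := goRightB_lt f n v c hc
    have hfa : ∀ i, a ≤ i → i ≤ b → f i = v := by
      intro i h1 h2
      rcases Nat.lt_or_ge i c with hlt | hge
      · exact goLeftB_all f v c i h1 hlt
      · rcases Nat.eq_or_lt_of_le hge with he | hlt2
        · rw [← he]
        · exact goRightB_all f n v c i hlt2 h2
    have hstop : b + 1 = n ∨ f (b + 1) ≠ v := by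
      rcases goRightB_stop f n v c with h1 | h1
      · left; omega
      · right; exact h1
    have hrun : runA f n v a = b + 1 - a := runA_eq_of f a b (by omega) hbn hfa hstop
    have hfav : f a = v := hfa a le_rfl (by omega)
    refine ⟨a, hal, ?_, ?_, ?_⟩
    · rw [hfav, hrun]; omega
    · rw [hfav]; exact hv
    · rw [hfav, hrun]; omega
  · rintro ⟨s, h1, h2, h3, h4⟩
    have hfc : f c = f s := by
      have := (runA_mem f n (f s) (c - s) s (by omega)).2
      rwa [show s + (c - s) = c by omega] at this
    set v := f s with hv'
    set k := runA f n v s with hk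
    have hall : ∀ i, s ≤ i → i < s + k → f i = v := by
      intro i hi1 hi2
      have := (runA_mem f n v (i - s) s (by omega)).2
      rwa [show s + (i - s) = i by omega] at this
    have hkn : s + k ≤ n := runA_add_le f (by omega)
    have hA : goLeftB f (f c) c ≤ s := by
      rw [hfc]
      exact goLeftB_min f v c s h1 (fun i hi1 hi2 => hall i hi1 (by omega))
    have hB : s + k - 1 ≤ goRightB f n (f c) c := by
      rw [hfc]
      exact goRightB_max f n v c (s + k - 1) (by omega) (by omega)
        (fun i hi1 hi2 => hall i (by omega) (by omega))
    omega


-- ---------- destB in terms of HM ----------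
theorem destB_iff {g : List (List Int)} {n r c : Nat} (hr : r < n) (hc : c < n) :
    destB g n r c = true ↔
      HM (fun x => gg 0 g r x) n c ∨ HM (fun x => gg 0 g x c) n r := by
  unfold destB
  by_cases hv : gg 0 g r c = 0
  · rw [if_pos hv]
    simp only [Bool.false_eq_true, false_iff]
    rintro (h | h)
    · exact (HM_ne_zero h) hv
    · exact (HM_ne_zero h) hv
  · simp only [if_neg hv]
    by_cases h1 : 3 ≤ goRightB (fun x => gg 0 g r x) n (gg 0 g r c) c -
        goLeftB (fun x => gg 0 g r x) (gg 0 g r c) c + 1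
    · simp only [if_pos h1, true_iff]
      exact Or.inl ((bridgeB (fun x => gg 0 g r x) hc hv).mp h1)
    · simp only [if_neg h1, decide_eq_true_eq]
      constructor
      · intro h2
        exact Or.inr ((bridgeB (fun x => gg 0 g x c) hr hv).mp h2)
      · rintro (h2 | h2)
        · exact absurd ((bridgeB (fun x => gg 0 g r x) hc hv).mpr h2) h1
        · exact (bridgeB (fun x => gg 0 g x c) hr hv).mpr h2

-- ---------- fold over List.range with an indexed invariant ----------
theorem foldl_range_inv {σ : Type} (m : Nat) (f : σ → Nat → σ) (P : Nat → σ → Prop) (s0 : σ)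
    (h0 : P 0 s0) (hs : ∀ k s, k < m → P k s → P (k + 1) (f s k)) :
    P m ((List.range m).foldl f s0) := by
  induction m with
  | zero => simpa using h0
  | succ m ih =>
    rw [List.range_succ, List.foldl_append]
    exact hs m _ (by omega) (ih (fun k s hk => hs k s (by omega)))

-- ---------- the bounded-witness form of HM ----------
def HMlt (f : Nat → Int) (n k c : Nat) : Prop :=
  ∃ s, s < k ∧ s ≤ c ∧ c < s + runA f n (f s) s ∧ f s ≠ 0 ∧ 3 ≤ runA f n (f s) s

theorem HMlt_zero (f : Nat → Int) (n c : Nat) : ¬ HMlt f n 0 c := by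
  rintro ⟨s, h, _⟩; omega

theorem HM_iff_HMlt {f : Nat → Int} {n c : Nat} (hc : c < n) :
    HM f n c ↔ HMlt f n (n - 2) c := by
  constructor
  · rintro ⟨s, h1, h2, h3, h4⟩
    have := runA_add_le f (n := n) (v := f s) (pos := s) (by omega)
    exact ⟨s, by omega, h1, h2, h3, h4⟩
  · rintro ⟨s, _, h1, h2, h3, h4⟩
    exact ⟨s, h1, h2, h3, h4⟩

-- a run start inside an already-covered run marks nothing new
theorem run_nested {f : Nat → Int} {n s k : Nat} (h1 : s ≤ k)
    (h2 : k < s + runA f n (f s) s) :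
    f k = f s ∧ runA f n (f k) k = runA f n (f s) s - (k - s) := by
  have hm := runA_mem f n (f s) (k - s) s (by omega)
  rw [show s + (k - s) = k by omega] at hm
  refine ⟨hm.2, ?_⟩
  have := runA_shift f n (f s) (k - s) s (by omega)
  rw [show s + (k - s) = k by omega] at this
  rw [hm.2]
  exact this

theorem HMlt_succ_of_covered {f : Nat → Int} {n k c : Nat}
    (hcov : HMlt f n k k) : (HMlt f n (k + 1) c ↔ HMlt f n k c) := by
  constructor
  · rintro ⟨s, hs1, hs2, hs3, hs4, hs5⟩
    by_cases hsk : s = k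
    · subst hsk
      obtain ⟨t, ht1, ht2, ht3, ht4, ht5⟩ := hcov
      obtain ⟨hfk, hrk⟩ := run_nested ht2 ht3
      rw [hrk] at hs3 hs5
      exact ⟨t, ht1, by omega, by omega, ht4, ht5⟩
    · exact ⟨s, by omega, hs2, hs3, hs4, hs5⟩
  · rintro ⟨s, hs1, hs2, hs3, hs4, hs5⟩
    exact ⟨s, by omega, hs2, hs3, hs4, hs5⟩

theorem HMlt_succ_not_start {f : Nat → Int} {n k c : Nat}
    (h : f k = 0 ∨ ¬ 3 ≤ runA f n (f k) k) : (HMlt f n (k + 1) c ↔ HMlt f n k c) := by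
  constructor
  · rintro ⟨s, hs1, hs2, hs3, hs4, hs5⟩
    by_cases hsk : s = k
    · subst hsk
      rcases h with h | h
      · exact absurd h hs4
      · exact absurd hs5 h
    · exact ⟨s, by omega, hs2, hs3, hs4, hs5⟩
  · rintro ⟨s, hs1, hs2, hs3, hs4, hs5⟩
    exact ⟨s, by omega, hs2, hs3, hs4, hs5⟩

theorem HMlt_succ_start {f : Nat → Int} {n k c : Nat} :
    (HMlt f n (k + 1) c ↔
      HMlt f n k c ∨ (f k ≠ 0 ∧ 3 ≤ runA f n (f k) k ∧ k ≤ c ∧ c < k + runA f n (f k) k)) := by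
  constructor
  · rintro ⟨s, hs1, hs2, hs3, hs4, hs5⟩
    by_cases hsk : s = k
    · subst hsk; exact Or.inr ⟨hs4, hs5, hs2, hs3⟩
    · exact Or.inl ⟨s, by omega, hs2, hs3, hs4, hs5⟩
  · rintro (⟨s, hs1, hs2, hs3, hs4, hs5⟩ | ⟨h1, h2, h3, h4⟩)
    · exact ⟨s, by omega, hs2, hs3, hs4, hs5⟩
    · exact ⟨k, by omega, h3, h4, h1, h2⟩

-- ---------- replicate grid ----------
theorem shape_replicate {α : Type} (n : Nat) (x : α) :
    ShapeG (List.replicate n (List.replicate n x)) n := by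
  refine ⟨by simp, ?_⟩
  intro row hrow
  rw [List.eq_of_mem_replicate hrow]
  simp

theorem gg_replicate {α : Type} (d x : α) {n r c : Nat} (hr : r < n) (hc : c < n) :
    gg d (List.replicate n (List.replicate n x)) r c = x := by
  unfold gg
  rw [List.getD_replicate _ hr, List.getD_replicate _ hc]

-- ---------- marking ranges ----------
theorem markRowA_spec (n : Nat) :
    ∀ (size start : Nat) (cr : List (List Nat)) (r : Nat), ShapeG cr n → r < n →
      start + size ≤ n →
      ShapeG (markRowA cr r start size) n ∧
      ∀ r' c', r' < n → c' < n →
        gg 0 (markRowA cr r start size) r' c' =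
          if r' = r ∧ start ≤ c' ∧ c' < start + size then 1 else gg 0 cr r' c' := by
  intro size
  induction size with
  | zero =>
    intro start cr r hs hr hle
    refine ⟨by simpa [markRowA] using hs, ?_⟩
    intro r' c' h1 h2
    simp only [markRowA, List.range'_zero, List.foldl_nil]
    have : ¬(r' = r ∧ start ≤ c' ∧ c' < start + 0) := by omega
    rw [if_neg this]
  | succ size ih =>
    intro start cr r hs hr hle
    have hstep : markRowA cr r start (size + 1) =
        markRowA (gs cr r start 1) r (start + 1) size := by
      unfold markRowA
      rw [List.range'_succ, List.foldl_cons]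
    have hs' : ShapeG (gs cr r start 1) n := shape_gs hs _ _ _
    obtain ⟨ha, hb⟩ := ih (start + 1) (gs cr r start 1) r hs' hr (by omega)
    refine ⟨by rwa [hstep], ?_⟩
    intro r' c' h1 h2
    rw [hstep, hb r' c' h1 h2]
    by_cases hin : r' = r ∧ start + 1 ≤ c' ∧ c' < start + 1 + size
    · rw [if_pos hin, if_pos (by omega)]
    · rw [if_neg hin]
      by_cases hat : r' = r ∧ c' = start
      · rw [if_pos (by omega), hat.1, hat.2, gg_gs_same _ hs hr (by omega)]
      · rw [if_neg (by omega)]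
        apply gg_gs_ne
        by_cases hrr : r' = r
        · right; intro hx; exact hat ⟨hrr, hx⟩
        · left; exact hrr

theorem markColA_spec (n : Nat) :
    ∀ (size start : Nat) (cr : List (List Nat)) (c : Nat), ShapeG cr n → c < n →
      start + size ≤ n →
      ShapeG (markColA cr c start size) n ∧
      ∀ r' c', r' < n → c' < n →
        gg 0 (markColA cr c start size) r' c' =
          if c' = c ∧ start ≤ r' ∧ r' < start + size then 2 else gg 0 cr r' c' := by
  intro size
  induction size with
  | zero =>
    intro start cr c hs hc hle
    refine ⟨by simpa [markColA] using hs, ?_⟩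
    intro r' c' h1 h2
    simp only [markColA, List.range'_zero, List.foldl_nil]
    have : ¬(c' = c ∧ start ≤ r' ∧ r' < start + 0) := by omega
    rw [if_neg this]
  | succ size ih =>
    intro start cr c hs hc hle
    have hstep : markColA cr c start (size + 1) =
        markColA (gs cr start c 2) c (start + 1) size := by
      unfold markColA
      rw [List.range'_succ, List.foldl_cons]
    have hs' : ShapeG (gs cr start c 2) n := shape_gs hs _ _ _
    obtain ⟨ha, hb⟩ := ih (start + 1) (gs cr start c 2) c hs' hc (by omega)
    refine ⟨by rwa [hstep], ?_⟩
    intro r' c' h1 h2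
    rw [hstep, hb r' c' h1 h2]
    by_cases hin : c' = c ∧ start + 1 ≤ r' ∧ r' < start + 1 + size
    · rw [if_pos hin, if_pos (by omega)]
    · rw [if_neg hin]
      by_cases hat : c' = c ∧ r' = start
      · rw [if_pos (by omega), hat.1, hat.2, gg_gs_same _ hs (by omega) hc]
      · rw [if_neg (by omega)]
        apply gg_gs_ne
        by_cases hcc : c' = c
        · left; intro hx; exact hat ⟨hcc, hx⟩
        · right; exact hcc


-- ---------- the horizontal sweep marks exactly the cells of long row runs ----------
def crInvH (g : List (List Int)) (n r k : Nat) (st : Bool × List (List Nat)) : Prop :=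
  ShapeG st.2 n ∧
  (∀ r' c', r' < n → c' < n →
    (gg 0 st.2 r' c' = 1 ↔
      ((r' < r ∧ HM (fun x => gg 0 g r' x) n c') ∨
       (r' = r ∧ HMlt (fun x => gg 0 g r' x) n k c'))) ∧
    (gg 0 st.2 r' c' = 0 ∨ gg 0 st.2 r' c' = 1)) ∧
  (st.1 = true ↔ ∃ r' c', r' < n ∧ c' < n ∧ gg 0 st.2 r' c' ≠ 0)

theorem stepH_inv {g : List (List Int)} {n r k : Nat} {st : Bool × List (List Nat)}
    (hk : k < n - 2) (hr : r < n) (h : crInvH g n r k st) :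
    crInvH g n r (k + 1)
      (if gg 0 st.2 r k ≠ 1 ∧ gg 0 g r k ≠ 0 then
        let point := gg 0 g r k
        let size := runA (fun cc => gg 0 g r cc) n point k
        if 3 ≤ size then (true, markRowA st.2 r k size) else st
      else st) := by
  obtain ⟨hsh, hpt, hfl⟩ := h
  by_cases hcond : gg 0 st.2 r k ≠ 1 ∧ gg 0 g r k ≠ 0
  · rw [if_pos hcond]
    simp only
    by_cases hsize : 3 ≤ runA (fun cc => gg 0 g r cc) n (gg 0 g r k) k
    · rw [if_pos hsize]
      have hkn : k ≤ n := Nat.le_of_lt (Nat.lt_of_lt_of_le hk (Nat.sub_le n 2))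
      have hkle : k + runA (fun cc => gg 0 g r cc) n (gg 0 g r k) k ≤ n :=
        runA_add_le (fun cc => gg 0 g r cc) (n := n) (v := gg 0 g r k) (pos := k) hkn
      obtain ⟨hsh', hpw⟩ := markRowA_spec n _ k st.2 r hsh hr hkle
      refine ⟨hsh', ?_, ?_⟩
      · intro r' c' h1 h2
        rw [hpw r' c' h1 h2]
        by_cases hin : r' = r ∧ k ≤ c' ∧ c' < k + runA (fun cc => gg 0 g r cc) n (gg 0 g r k) k
        · rw [if_pos hin]
          refine ⟨⟨fun _ => ?_, fun _ => rfl⟩, Or.inr rfl⟩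
          refine Or.inr ⟨hin.1, ?_⟩
          rw [hin.1]
          exact (HMlt_succ_start).mpr (Or.inr ⟨hcond.2, hsize, hin.2.1, hin.2.2⟩)
        · rw [if_neg hin]
          refine ⟨?_, (hpt r' c' h1 h2).2⟩
          rw [(hpt r' c' h1 h2).1]
          by_cases hrr : r' = r
          · subst hrr
            have heq : HMlt (fun x => gg 0 g r' x) n (k + 1) c' ↔
                HMlt (fun x => gg 0 g r' x) n k c' := by
              rw [HMlt_succ_start]
              constructor
              · rintro (hh | hh)
                · exact hh
                · exact absurd ⟨rfl, hh.2.2.1, hh.2.2.2⟩ hin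
              · exact Or.inl
            rw [heq]
          · simp [hrr]
      · refine ⟨fun _ => ⟨r, k, hr, by omega, ?_⟩, fun _ => rfl⟩
        rw [hpw r k hr (by omega), if_pos ⟨rfl, le_rfl, by omega⟩]
        omega
    · rw [if_neg hsize]
      refine ⟨hsh, ?_, hfl⟩
      intro r' c' h1 h2
      refine ⟨?_, (hpt r' c' h1 h2).2⟩
      rw [(hpt r' c' h1 h2).1]
      by_cases hrr : r' = r
      · subst hrr
        rw [HMlt_succ_not_start (Or.inr hsize)]
      · simp [hrr]
  · rw [if_neg hcond]
    refine ⟨hsh, ?_, hfl⟩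
    intro r' c' h1 h2
    refine ⟨?_, (hpt r' c' h1 h2).2⟩
    rw [(hpt r' c' h1 h2).1]
    by_cases hrr : r' = r
    · subst hrr
      rcases Decidable.not_and_iff_not_or_not.mp hcond with h1c | h1c
      · have hmk : gg 0 st.2 r' k = 1 := by simpa using h1c
        have hcov : HMlt (fun x => gg 0 g r' x) n k k := by
          have hkn : k < n := Nat.lt_of_lt_of_le hk (Nat.sub_le n 2)
          rcases ((hpt r' k h1 hkn).1.mp hmk) with hh | hh
          · omega
          · exact hh.2
        rw [HMlt_succ_of_covered hcov]
      · have hz : gg 0 g r' k = 0 := by simpa using h1c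
        rw [HMlt_succ_not_start (Or.inl hz)]
    · simp [hrr]

theorem horizA_spec (g : List (List Int)) (n : Nat) : crInvH g n n 0 (horizA g n) := by
  unfold horizA
  apply foldl_range_inv n _ (fun r st => crInvH g n r 0 st)
  · refine ⟨shape_replicate n 0, ?_, ?_⟩
    · intro r' c' h1 h2
      rw [gg_replicate 0 0 h1 h2]
      constructor
      · constructor
        · intro h; omega
        · rintro (⟨_, _⟩ | ⟨_, hh⟩)
          · omega
          · exact absurd hh (HMlt_zero _ n c')
      · left; rfl
    · constructor
      · intro h; simp at h
      · rintro ⟨r', c', h1, h2, h3⟩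
        exact absurd (gg_replicate 0 0 h1 h2) h3
  · intro r st hrn hinv
    simp only
    have hend : crInvH g n r (n - 2)
        ((List.range (n - 2)).foldl (fun st c1 =>
          if gg 0 st.2 r c1 ≠ 1 ∧ gg 0 g r c1 ≠ 0 then
            let point := gg 0 g r c1
            let size := runA (fun cc => gg 0 g r cc) n point c1
            if 3 ≤ size then (true, markRowA st.2 r c1 size) else st
          else st) st) := by
      apply foldl_range_inv (n - 2) _ (fun k st => crInvH g n r k st) st hinv
      intro k s hk hi
      exact stepH_inv hk hrn hi
    obtain ⟨hsh, hpt, hfl⟩ := hend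
    refine ⟨hsh, ?_, hfl⟩
    intro r' c' h1 h2
    refine ⟨?_, (hpt r' c' h1 h2).2⟩
    rw [(hpt r' c' h1 h2).1]
    constructor
    · rintro (⟨hh1, hh2⟩ | ⟨hh1, hh2⟩)
      · exact Or.inl ⟨by omega, hh2⟩
      · exact Or.inl ⟨by omega, (HM_iff_HMlt h2).mpr hh2⟩
    · rintro (⟨hh1, hh2⟩ | ⟨hh1, hh2⟩)
      · rcases Nat.lt_or_ge r' r with hlt | hge
        · exact Or.inl ⟨hlt, hh2⟩
        · have : r' = r := by omega
          exact Or.inr ⟨this, by rw [← this] at *; exact (HM_iff_HMlt h2).mp hh2⟩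
      · exact absurd hh2 (HMlt_zero _ n c')


-- ---------- the vertical sweep marks (with 2) exactly the cells of long column runs ----------
def V2 (g : List (List Int)) (n c k r' c' : Nat) : Prop :=
  (c' < c ∧ HM (fun x => gg 0 g x c') n r') ∨
  (c' = c ∧ HMlt (fun x => gg 0 g x c') n k r')

def crInvV (g : List (List Int)) (n c k : Nat) (st : Bool × List (List Nat)) : Prop :=
  ShapeG st.2 n ∧
  (∀ r' c', r' < n → c' < n →
    (gg 0 st.2 r' c' = 2 ↔ V2 g n c k r' c') ∧
    (gg 0 st.2 r' c' = 1 ↔ (HM (fun x => gg 0 g r' x) n c' ∧ ¬ V2 g n c k r' c')) ∧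
    (gg 0 st.2 r' c' = 0 ∨ gg 0 st.2 r' c' = 1 ∨ gg 0 st.2 r' c' = 2)) ∧
  (st.1 = true ↔ ∃ r' c', r' < n ∧ c' < n ∧ gg 0 st.2 r' c' ≠ 0)

theorem stepV_inv {g : List (List Int)} {n c k : Nat} {st : Bool × List (List Nat)}
    (hk : k < n - 2) (hc : c < n) (h : crInvV g n c k st) :
    crInvV g n c (k + 1)
      (if gg 0 st.2 k c ≠ 2 ∧ gg 0 g k c ≠ 0 then
        let point := gg 0 g k c
        let size := runA (fun rr => gg 0 g rr c) n point k
        if 3 ≤ size then (true, markColA st.2 c k size) else st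
      else st) := by
  obtain ⟨hsh, hpt, hfl⟩ := h
  have hkn : k < n := Nat.lt_of_lt_of_le hk (Nat.sub_le n 2)
  by_cases hcond : gg 0 st.2 k c ≠ 2 ∧ gg 0 g k c ≠ 0
  · rw [if_pos hcond]
    simp only
    by_cases hsize : 3 ≤ runA (fun rr => gg 0 g rr c) n (gg 0 g k c) k
    · rw [if_pos hsize]
      have hkle : k + runA (fun rr => gg 0 g rr c) n (gg 0 g k c) k ≤ n :=
        runA_add_le (fun rr => gg 0 g rr c) (n := n) (v := gg 0 g k c) (pos := k)
          (Nat.le_of_lt hkn)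
      obtain ⟨hsh', hpw⟩ := markColA_spec n _ k st.2 c hsh hc hkle
      refine ⟨hsh', ?_, ?_⟩
      · intro r' c' h1 h2
        rw [hpw r' c' h1 h2]
        by_cases hin : c' = c ∧ k ≤ r' ∧ r' < k + runA (fun rr => gg 0 g rr c) n (gg 0 g k c) k
        · rw [if_pos hin]
          have hv2 : V2 g n c (k + 1) r' c' := by
            refine Or.inr ⟨hin.1, ?_⟩
            rw [hin.1]
            exact (HMlt_succ_start).mpr (Or.inr ⟨hcond.2, hsize, hin.2.1, hin.2.2⟩)
          refine ⟨⟨fun _ => hv2, fun _ => rfl⟩, ⟨?_, fun hh => absurd hv2 hh.2⟩,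
            Or.inr (Or.inr rfl)⟩
          intro h21
          exact absurd h21 (by omega)
        · rw [if_neg hin]
          have heq : V2 g n c (k + 1) r' c' ↔ V2 g n c k r' c' := by
            unfold V2
            by_cases hcc : c' = c
            · subst hcc
              rw [HMlt_succ_start]
              constructor
              · rintro (hh | ⟨he, hh | hh⟩)
                · exact Or.inl hh
                · exact Or.inr ⟨he, hh⟩
                · exact absurd ⟨rfl, hh.2.2.1, hh.2.2.2⟩ hin
              · rintro (hh | ⟨he, hh⟩)
                · exact Or.inl hh
                · exact Or.inr ⟨he, Or.inl hh⟩
            · simp [hcc]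
          rw [heq]
          exact hpt r' c' h1 h2
      · refine ⟨fun _ => ⟨k, c, hkn, hc, ?_⟩, fun _ => rfl⟩
        rw [hpw k c hkn hc, if_pos ⟨rfl, le_rfl, by omega⟩]
        omega
    · rw [if_neg hsize]
      refine ⟨hsh, ?_, hfl⟩
      intro r' c' h1 h2
      have heq : V2 g n c (k + 1) r' c' ↔ V2 g n c k r' c' := by
        unfold V2
        by_cases hcc : c' = c
        · subst hcc
          rw [HMlt_succ_not_start (Or.inr hsize)]
        · simp [hcc]
      rw [heq]
      exact hpt r' c' h1 h2
  · rw [if_neg hcond]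
    refine ⟨hsh, ?_, hfl⟩
    intro r' c' h1 h2
    have heq : V2 g n c (k + 1) r' c' ↔ V2 g n c k r' c' := by
      unfold V2
      by_cases hcc : c' = c
      · subst hcc
        rcases Decidable.not_and_iff_not_or_not.mp hcond with h1c | h1c
        · have hmk : gg 0 st.2 k c' = 2 := by simpa using h1c
          have hcov : HMlt (fun x => gg 0 g x c') n k k := by
            rcases ((hpt k c' hkn hc).1.mp hmk) with hh | hh
            · omega
            · exact hh.2
          rw [HMlt_succ_of_covered hcov]
        · have hz : gg 0 g k c' = 0 := by simpa using h1c
          rw [HMlt_succ_not_start (f := fun x => gg 0 g x c') (Or.inl hz)]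
      · simp [hcc]
    rw [heq]
    exact hpt r' c' h1 h2

theorem vertA_spec (g : List (List Int)) (n : Nat) {st0 : Bool × List (List Nat)}
    (h0 : crInvH g n n 0 st0) : crInvV g n n 0 (vertA g n st0) := by
  unfold vertA
  apply foldl_range_inv n _ (fun c st => crInvV g n c 0 st)
  · obtain ⟨hsh, hpt, hfl⟩ := h0
    refine ⟨hsh, ?_, hfl⟩
    intro r' c' h1 h2
    have h2iff : ¬ V2 g n 0 0 r' c' := by
      rintro (hh | hh)
      · omega
      · exact absurd hh.2 (HMlt_zero _ n r')
    refine ⟨⟨?_, fun hh => absurd hh h2iff⟩, ?_, ?_⟩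
    · intro hh
      rcases (hpt r' c' h1 h2).2 with h3 | h3 <;> omega
    · rw [(hpt r' c' h1 h2).1]
      constructor
      · rintro (hh | hh)
        · exact ⟨hh.2, h2iff⟩
        · omega
      · rintro ⟨hh, _⟩
        exact Or.inl ⟨h1, hh⟩
    · rcases (hpt r' c' h1 h2).2 with h3 | h3
      · exact Or.inl h3
      · exact Or.inr (Or.inl h3)
  · intro c st hcn hinv
    simp only
    have hend : crInvV g n c (n - 2)
        ((List.range (n - 2)).foldl (fun st r2 =>
          if gg 0 st.2 r2 c ≠ 2 ∧ gg 0 g r2 c ≠ 0 then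
            let point := gg 0 g r2 c
            let size := runA (fun rr => gg 0 g rr c) n point r2
            if 3 ≤ size then (true, markColA st.2 c r2 size) else st
          else st) st) := by
      apply foldl_range_inv (n - 2) _ (fun k st => crInvV g n c k st) st hinv
      intro k s hk hi
      exact stepV_inv hk hcn hi
    obtain ⟨hsh, hpt, hfl⟩ := hend
    refine ⟨hsh, ?_, hfl⟩
    intro r' c' h1 h2
    have heq : V2 g n (c + 1) 0 r' c' ↔ V2 g n c (n - 2) r' c' := by
      unfold V2
      constructor
      · rintro (⟨hh1, hh2⟩ | ⟨hh1, hh2⟩)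
        · rcases Nat.lt_or_ge c' c with hlt | hge
          · exact Or.inl ⟨hlt, hh2⟩
          · have : c' = c := by omega
            exact Or.inr ⟨this, (HM_iff_HMlt h1).mp hh2⟩
        · exact absurd hh2 (HMlt_zero _ n r')
      · rintro (⟨hh1, hh2⟩ | ⟨hh1, hh2⟩)
        · exact Or.inl ⟨by omega, hh2⟩
        · exact Or.inl ⟨by omega, (HM_iff_HMlt h1).mpr hh2⟩
    rw [heq]
    exact hpt r' c' h1 h2

-- combined: after both sweeps the nonzero crush marks are exactly destB, and the flag
-- says some cell is marked
theorem mark_spec (g : List (List Int)) (n : Nat) :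
    ShapeG (vertA g n (horizA g n)).2 n ∧
    (∀ r c, r < n → c < n →
      (gg 0 (vertA g n (horizA g n)).2 r c ≠ 0 ↔ destB g n r c = true)) ∧
    ((vertA g n (horizA g n)).1 = true ↔
      ∃ r c, r < n ∧ c < n ∧ destB g n r c = true) := by
  obtain ⟨hsh, hpt, hfl⟩ := vertA_spec g n (horizA_spec g n)
  have hcell : ∀ r c, r < n → c < n →
      (gg 0 (vertA g n (horizA g n)).2 r c ≠ 0 ↔ destB g n r c = true) := by
    intro r c h1 h2
    rw [destB_iff h1 h2]
    obtain ⟨i2, i1, i0⟩ := hpt r c h1 h2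
    have hv2 : V2 g n n 0 r c ↔ HM (fun x => gg 0 g x c) n r := by
      unfold V2
      constructor
      · rintro (hh | hh)
        · exact hh.2
        · omega
      · intro hh
        exact Or.inl ⟨h2, hh⟩
    constructor
    · intro hne
      rcases i0 with h3 | h3 | h3
      · exact absurd h3 hne
      · exact Or.inl (i1.mp h3).1
      · exact Or.inr (hv2.mp (i2.mp h3))
    · rintro (hh | hh)
      · by_cases hvv : V2 g n n 0 r c
        · rw [i2.mpr hvv]; omega
        · rw [i1.mpr ⟨hh, hvv⟩]; omega
      · rw [i2.mpr (hv2.mpr hh)]; omega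
  refine ⟨hsh, hcell, ?_⟩
  rw [hfl]
  constructor
  · rintro ⟨r, c, h1, h2, h3⟩
    exact ⟨r, c, h1, h2, (hcell r c h1 h2).mp h3⟩
  · rintro ⟨r, c, h1, h2, h3⟩
    exact ⟨r, c, h1, h2, (hcell r c h1 h2).mpr h3⟩


-- ---------- crush-and-count (A) ----------
def rowMarks (cr : List (List Nat)) (n r : Nat) : Nat :=
  (List.range n).countP (fun c => decide (gg 0 cr r c ≠ 0))

theorem crushCountA_spec (g : List (List Int)) (cr : List (List Nat)) (n : Nat) (result : Int)
    (hg : ShapeG g n) :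
    ShapeG (crushCountA g cr n result).1 n ∧
    (∀ r c, r < n → c < n →
      gg 0 (crushCountA g cr n result).1 r c =
        if gg 0 cr r c ≠ 0 then 0 else gg 0 g r c) ∧
    (crushCountA g cr n result).2 =
      result + ((List.range n).map (fun i => (rowMarks cr n i : Int))).sum := by
  unfold crushCountA
  have main := foldl_range_inv n (fun p r3 =>
    (List.range n).foldl (fun p c3 =>
      if gg 0 cr r3 c3 ≠ 0 then (gs p.1 r3 c3 0, p.2 + 1) else p) p) (fun r p =>
    ShapeG p.1 n ∧
    (∀ r' c', r' < n → c' < n →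
      gg 0 p.1 r' c' = if r' < r ∧ gg 0 cr r' c' ≠ 0 then 0 else gg 0 g r' c') ∧
    p.2 = result + ((List.range r).map (fun i => (rowMarks cr n i : Int))).sum) (g, result)
    ⟨hg, by intro r' c' h1 h2; rw [if_neg (by omega)], by simp⟩
    ?_
  · refine ⟨main.1, ?_, main.2.2⟩
    intro r c h1 h2
    rw [main.2.1 r c h1 h2]
    by_cases hm : gg 0 cr r c ≠ 0
    · rw [if_pos ⟨h1, hm⟩, if_pos hm]
    · rw [if_neg (fun hh => hm hh.2), if_neg hm]
  · intro r p hrn hp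
    simp only
    have inner := foldl_range_inv n (fun p c3 =>
      if gg 0 cr r c3 ≠ 0 then (gs p.1 r c3 0, p.2 + 1) else p) (fun k p =>
      ShapeG p.1 n ∧
      (∀ r' c', r' < n → c' < n →
        gg 0 p.1 r' c' =
          if (r' < r ∨ (r' = r ∧ c' < k)) ∧ gg 0 cr r' c' ≠ 0 then 0 else gg 0 g r' c') ∧
      p.2 = result + ((List.range r).map (fun i => (rowMarks cr n i : Int))).sum +
        ((List.range k).countP (fun c => decide (gg 0 cr r c ≠ 0)) : Int)) p
      ⟨hp.1, by
        intro r' c' h1 h2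
        rw [hp.2.1 r' c' h1 h2]
        congr 1
        simp only [eq_iff_iff]
        constructor
        · rintro ⟨hh, h4⟩
          exact ⟨Or.inl hh, h4⟩
        · rintro ⟨hh | hh, h4⟩
          · exact ⟨hh, h4⟩
          · omega, by simpa using hp.2.2⟩
      ?_
    · refine ⟨inner.1, ?_, ?_⟩
      · intro r' c' h1 h2
        rw [inner.2.1 r' c' h1 h2]
        congr 1
        simp only [eq_iff_iff]
        constructor
        · rintro ⟨hh, h4⟩
          refine ⟨?_, h4⟩
          rcases hh with hh | hh
          · omega
          · omega
        · rintro ⟨hh, h4⟩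
          rcases Nat.lt_or_ge r' r with hlt | hge
          · exact ⟨Or.inl hlt, h4⟩
          · exact ⟨Or.inr ⟨by omega, h2⟩, h4⟩
      · rw [inner.2.2, List.range_succ, List.map_append, List.sum_append]
        simp only [List.map_cons, List.map_nil, List.sum_cons, List.sum_nil, rowMarks]
        ring
    · intro k q hkn hq
      simp only
      by_cases hm : gg 0 cr r k ≠ 0
      · rw [if_pos hm]
        refine ⟨shape_gs hq.1 _ _ _, ?_, ?_⟩
        · intro r' c' h1 h2
          by_cases hat : r' = r ∧ c' = k
          · rw [hat.1, hat.2, gg_gs_same _ hq.1 hrn hkn]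
            rw [if_pos ⟨Or.inr ⟨rfl, by omega⟩, hm⟩]
          · rw [gg_gs_ne _ _ _ (by tauto), hq.2.1 r' c' h1 h2]
            congr 1
            simp only [eq_iff_iff]
            constructor
            · rintro ⟨hh | hh, h4⟩
              · exact ⟨Or.inl hh, h4⟩
              · exact ⟨Or.inr ⟨hh.1, by omega⟩, h4⟩
            · rintro ⟨hh | hh, h4⟩
              · exact ⟨Or.inl hh, h4⟩
              · have hck : c' ≠ k := fun hx => hat ⟨hh.1, hx⟩
                exact ⟨Or.inr ⟨hh.1, by omega⟩, h4⟩
        · simp only [hq.2.2, List.range_succ, List.countP_append]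
          rw [List.countP_singleton, decide_eq_true hm]
          push_cast
          simp only [if_true]
          ring
      · rw [if_neg hm]
        refine ⟨hq.1, ?_, ?_⟩
        · intro r' c' h1 h2
          rw [hq.2.1 r' c' h1 h2]
          congr 1
          simp only [eq_iff_iff]
          constructor
          · rintro ⟨hh | hh, h4⟩
            · exact ⟨Or.inl hh, h4⟩
            · exact ⟨Or.inr ⟨hh.1, by omega⟩, h4⟩
          · rintro ⟨hh | hh, h4⟩
            · exact ⟨Or.inl hh, h4⟩
            · refine ⟨Or.inr ⟨hh.1, ?_⟩, h4⟩
              rcases Nat.lt_or_ge c' k with hlt | hge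
              · exact hlt
              · have : c' = k := by omega
                rw [this, hh.1] at h4
                exact absurd h4 hm
        · simp only [hq.2.2, List.range_succ, List.countP_append]
          rw [List.countP_singleton]
          simp [hm]

-- ---------- zeroing (B) ----------
theorem zeroB_spec (g : List (List Int)) (n : Nat) (de : List (List Bool)) (hg : ShapeG g n) :
    ShapeG ((List.range n).foldl (fun g r =>
      (List.range n).foldl (fun g c => if gg false de r c then gs g r c 0 else g) g) g) n ∧
    ∀ r c, r < n → c < n →
      gg 0 ((List.range n).foldl (fun g r =>
        (List.range n).foldl (fun g c => if gg false de r c then gs g r c 0 else g) g) g) r c =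
        if gg false de r c then 0 else gg 0 g r c := by
  have main := foldl_range_inv n (fun G r =>
    (List.range n).foldl (fun G c => if gg false de r c then gs G r c 0 else G) G) (fun r G =>
    ShapeG G n ∧
    ∀ r' c', r' < n → c' < n →
      gg 0 G r' c' = if r' < r ∧ gg false de r' c' then 0 else gg 0 g r' c') g
    ⟨hg, by intro r' c' h1 h2; rw [if_neg (by omega)]⟩ ?_
  · refine ⟨main.1, ?_⟩
    intro r c h1 h2
    rw [main.2 r c h1 h2]
    by_cases hm : gg false de r c
    · rw [if_pos ⟨h1, hm⟩, if_pos hm]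
    · rw [if_neg (fun hh => hm hh.2), if_neg hm]
  · intro r G hrn hG
    simp only
    have inner := foldl_range_inv n (fun G c => if gg false de r c then gs G r c 0 else G)
      (fun k G =>
      ShapeG G n ∧
      ∀ r' c', r' < n → c' < n →
        gg 0 G r' c' =
          if (r' < r ∨ (r' = r ∧ c' < k)) ∧ gg false de r' c' then 0 else gg 0 g r' c') G
      ⟨hG.1, by
        intro r' c' h1 h2
        rw [hG.2 r' c' h1 h2]
        congr 1
        simp only [eq_iff_iff]
        constructor
        · rintro ⟨hh, h4⟩
          exact ⟨Or.inl hh, h4⟩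
        · rintro ⟨hh | hh, h4⟩
          · exact ⟨hh, h4⟩
          · omega⟩ ?_
    · refine ⟨inner.1, ?_⟩
      intro r' c' h1 h2
      rw [inner.2 r' c' h1 h2]
      congr 1
      simp only [eq_iff_iff]
      constructor
      · rintro ⟨hh, h4⟩
        rcases hh with hh | hh
        · exact ⟨by omega, h4⟩
        · exact ⟨by omega, h4⟩
      · rintro ⟨hh, h4⟩
        rcases Nat.lt_or_ge r' r with hlt | hge
        · exact ⟨Or.inl hlt, h4⟩
        · exact ⟨Or.inr ⟨by omega, h2⟩, h4⟩
    · intro k G' hkn hG'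
      simp only
      by_cases hm : gg false de r k
      · rw [if_pos hm]
        refine ⟨shape_gs hG'.1 _ _ _, ?_⟩
        intro r' c' h1 h2
        by_cases hat : r' = r ∧ c' = k
        · rw [hat.1, hat.2, gg_gs_same _ hG'.1 hrn hkn]
          rw [if_pos ⟨Or.inr ⟨rfl, by omega⟩, hm⟩]
        · rw [gg_gs_ne _ _ _ (by tauto), hG'.2 r' c' h1 h2]
          congr 1
          simp only [eq_iff_iff]
          constructor
          · rintro ⟨hh | hh, h4⟩
            · exact ⟨Or.inl hh, h4⟩
            · exact ⟨Or.inr ⟨hh.1, by omega⟩, h4⟩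
          · rintro ⟨hh | hh, h4⟩
            · exact ⟨Or.inl hh, h4⟩
            · have hck : c' ≠ k := fun hx => hat ⟨hh.1, hx⟩
              exact ⟨Or.inr ⟨hh.1, by omega⟩, h4⟩
      · rw [if_neg hm]
        refine ⟨hG'.1, ?_⟩
        intro r' c' h1 h2
        rw [hG'.2 r' c' h1 h2]
        congr 1
        simp only [eq_iff_iff]
        constructor
        · rintro ⟨hh | hh, h4⟩
          · exact ⟨Or.inl hh, h4⟩
          · exact ⟨Or.inr ⟨hh.1, by omega⟩, h4⟩
        · rintro ⟨hh | hh, h4⟩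
          · exact ⟨Or.inl hh, h4⟩
          · refine ⟨Or.inr ⟨hh.1, ?_⟩, h4⟩
            rcases Nat.lt_or_ge c' k with hlt | hge
            · exact hlt
            · have : c' = k := by omega
              rw [this, hh.1] at h4
              exact absurd h4 hm


-- ---------- columns ----------
def colOf (g : List (List Int)) (n c : Nat) : List Int :=
  (List.range n).map (fun r => gg 0 g r c)

def NZ (col : List Int) : List Int := col.filter (fun x => x ≠ 0)

theorem colOf_length (g : List (List Int)) (n c : Nat) : (colOf g n c).length = n := by
  simp [colOf]

theorem colOf_getD {g : List (List Int)} {n c i : Nat} (h : i < n) :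
    (colOf g n c).getD i 0 = gg 0 g i c := by
  have hlen : i < (colOf g n c).length := by rw [colOf_length]; omega
  rw [List.getD_eq_getElem _ _ hlen]
  simp [colOf]

theorem colOf_getElem (g : List (List Int)) (n c i : Nat) (h : i < (colOf g n c).length) :
    (colOf g n c)[i] = gg 0 g i c := by
  simp [colOf]

theorem colOf_gs_same {g : List (List Int)} {n : Nat} (hs : ShapeG g n) {r c : Nat}
    (hr : r < n) (hc : c < n) (v : Int) :
    colOf (gs g r c v) n c = (colOf g n c).set r v := by
  apply List.ext_getElem (by rw [colOf_length, List.length_set, colOf_length])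
  intro i h1 h2
  rw [colOf_length] at h1
  simp only [colOf, List.getElem_map, List.getElem_range]
  by_cases hir : i = r
  · subst hir
    rw [List.getElem_set_self (by simp; omega)]
    rw [gg_gs_same _ hs hr hc]
  · rw [List.getElem_set_ne (fun hx => hir hx.symm), List.getElem_map, List.getElem_range,
      gg_gs_ne _ _ _ (Or.inl hir)]

theorem writeCol_spec (G : List (List Int)) (n k : Nat) (w : Nat → Int) (hs : ShapeG G n)
    (hk : k < n) :
    ShapeG ((List.range n).foldl (fun G r => gs G r k (w r)) G) n ∧
    ∀ r c', r < n → c' < n →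
      gg 0 ((List.range n).foldl (fun G r => gs G r k (w r)) G) r c' =
        if c' = k then w r else gg 0 G r c' := by
  have main := foldl_range_inv n (fun G r => gs G r k (w r)) (fun j G' =>
    ShapeG G' n ∧
    ∀ r c', r < n → c' < n →
      gg 0 G' r c' = if c' = k ∧ r < j then w r else gg 0 G r c') G
    ⟨hs, by intro r c' h1 h2; rw [if_neg (by omega)]⟩ ?_
  · refine ⟨main.1, ?_⟩
    intro r c' h1 h2
    rw [main.2 r c' h1 h2]
    by_cases hck : c' = k
    · rw [if_pos ⟨hck, h1⟩, if_pos hck]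
    · rw [if_neg (fun hh => hck hh.1), if_neg hck]
  · intro j G' hj hG'
    refine ⟨shape_gs hG'.1 _ _ _, ?_⟩
    intro r c' h1 h2
    by_cases hat : r = j ∧ c' = k
    · rw [hat.1, hat.2, gg_gs_same _ hG'.1 hj hk, if_pos ⟨rfl, by omega⟩]
    · have hne : r ≠ j ∨ c' ≠ k := by tauto
      rw [gg_gs_ne _ _ _ hne, hG'.2 r c' h1 h2]
      congr 1
      simp only [eq_iff_iff]
      constructor
      · rintro ⟨ha, hb⟩; exact ⟨ha, by omega⟩
      · rintro ⟨ha, hb⟩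
        refine ⟨ha, ?_⟩
        rcases hne with hne | hne
        · omega
        · exact absurd ha hne

-- ---------- A's upward scan ----------
theorem scanUpA_spec (f : Nat → Int) : ∀ s : Int, -1 ≤ s →
    (scanUpA f s = -1 ∧ ∀ i : Nat, (i : Int) ≤ s → f i = 0) ∨
    (0 ≤ scanUpA f s ∧ scanUpA f s ≤ s ∧ f (scanUpA f s).toNat ≠ 0 ∧
      ∀ i : Nat, scanUpA f s < (i : Int) → (i : Int) ≤ s → f i = 0) := by
  intro s
  induction hm : (s + 1).toNat using Nat.strong_induction_on generalizing s with
  | _ m ih =>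
    intro hs
    rw [scanUpA]
    by_cases hc : 0 ≤ s ∧ f s.toNat = 0
    · rw [dif_pos hc]
      rcases ih (s - 1 + 1).toNat (by omega) (s - 1) rfl (by omega) with ⟨h1, h2⟩ | ⟨h1, h2, h3, h4⟩
      · left
        refine ⟨h1, ?_⟩
        intro i hi
        rcases Int.lt_or_le (i : Int) s with hlt | hge
        · exact h2 i (by omega)
        · have : (i : Int) = s := by omega
          rw [← this] at hc
          simpa using hc.2
      · right
        refine ⟨h1, by omega, h3, ?_⟩
        intro i hi1 hi2
        rcases Int.lt_or_le (i : Int) s with hlt | hge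
        · exact h4 i hi1 (by omega)
        · have : (i : Int) = s := by omega
          rw [← this] at hc
          simpa using hc.2
    · rw [dif_neg hc]
      rcases Decidable.not_and_iff_not_or_not.mp hc with h1 | h1
      · left
        exact ⟨by omega, fun i hi => absurd hi (by omega)⟩
      · by_cases h0 : 0 ≤ s
        · right
          exact ⟨h0, le_rfl, h1, fun i hi1 hi2 => absurd hi2 (by omega)⟩
        · left
          exact ⟨by omega, fun i hi => absurd hi (by omega)⟩

theorem scanUpA_congr (f f' : Nat → Int) : ∀ s : Int,
    (∀ i : Nat, (i : Int) ≤ s → f i = f' i) → scanUpA f s = scanUpA f' s := by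
  intro s
  induction hm : (s + 1).toNat using Nat.strong_induction_on generalizing s with
  | _ m ih =>
    intro hagree
    rw [scanUpA]
    conv_rhs => rw [scanUpA]
    by_cases hc : 0 ≤ s ∧ f s.toNat = 0
    · have hc' : 0 ≤ s ∧ f' s.toNat = 0 :=
        ⟨hc.1, by rw [← hagree s.toNat (by omega)]; exact hc.2⟩
      rw [dif_pos hc, dif_pos hc']
      exact ih (s - 1 + 1).toNat (by omega) (s - 1) rfl (fun i hi => hagree i (by omega))
    · have hc' : ¬(0 ≤ s ∧ f' s.toNat = 0) := fun hx =>
        hc ⟨hx.1, by rw [hagree s.toNat (by omega)]; exact hx.2⟩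
      rw [dif_neg hc, dif_neg hc']


-- ---------- the pure column form of A's gravity loop ----------
def gravLoopC (col : List Int) : Nat → List Int
  | 0 => col
  | o + 1 =>
    let b_r : Int :=
      if col.getD (o + 1) 0 = 0 then scanUpA (fun i => col.getD i 0) ((o : Int) + 1)
      else (o : Int) + 1
    if 0 ≤ b_r then
      gravLoopC ((col.set b_r.toNat (col.getD (o + 1) 0)).set (o + 1) (col.getD b_r.toNat 0)) o
    else col

theorem gravColA_comm (n b_c : Nat) (hbc : b_c < n) :
    ∀ o g, o < n → ShapeG g n →
      ShapeG (gravColA g b_c o) n ∧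
      (∀ r c', r < n → c' < n → c' ≠ b_c → gg 0 (gravColA g b_c o) r c' = gg 0 g r c') ∧
      colOf (gravColA g b_c o) n b_c = gravLoopC (colOf g n b_c) o := by
  intro o
  induction o with
  | zero =>
    intro g _ hs
    exact ⟨hs, fun r c' _ _ _ => rfl, rfl⟩
  | succ o ih =>
    intro g ho hs
    have hocol : (colOf g n b_c).getD (o + 1) 0 = gg 0 g (o + 1) b_c := colOf_getD (by omega)
    have hscan : scanUpA (fun i => (colOf g n b_c).getD i 0) ((o : Int) + 1) =
        scanUpA (fun i => gg 0 g i b_c) ((o : Int) + 1) := by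
      apply scanUpA_congr
      intro i hi
      exact colOf_getD (by omega)
    have hbr : (if gg 0 g (o + 1) b_c = 0 then scanUpA (fun i => gg 0 g i b_c) ((o : Int) + 1)
        else (o : Int) + 1) =
        (if (colOf g n b_c).getD (o + 1) 0 = 0 then
          scanUpA (fun i => (colOf g n b_c).getD i 0) ((o : Int) + 1)
        else (o : Int) + 1) := by
      rw [hocol, hscan]
    rw [gravColA, gravLoopC]
    simp only [← hbr]
    set b_r : Int := if gg 0 g (o + 1) b_c = 0 then
      scanUpA (fun i => gg 0 g i b_c) ((o : Int) + 1) else (o : Int) + 1 with hbrdef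
    by_cases hpos : 0 ≤ b_r
    · rw [if_pos hpos, if_pos hpos]
      have hbrle : b_r ≤ (o : Int) + 1 := by
        rw [hbrdef]
        split_ifs with hz
        · rcases scanUpA_spec (fun i => gg 0 g i b_c) ((o : Int) + 1) (by omega) with
            ⟨h1, _⟩ | ⟨_, h2, _, _⟩
          · omega
          · exact h2
        · exact le_refl _
      have hbrn : b_r.toNat < n := by omega
      have hsX : ShapeG (gs g b_r.toNat b_c (gg 0 g (o + 1) b_c)) n := shape_gs hs _ _ _
      have hs2 : ShapeG (gs (gs g b_r.toNat b_c (gg 0 g (o + 1) b_c)) (o + 1) b_c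
          (gg 0 g b_r.toNat b_c)) n := shape_gs hsX _ _ _
      obtain ⟨ih1, ih2, ih3⟩ := ih _ (by omega) hs2
      refine ⟨ih1, ?_, ?_⟩
      · intro r c' h1 h2 h3
        rw [ih2 r c' h1 h2 h3, gg_gs_ne _ _ _ (Or.inr h3), gg_gs_ne _ _ _ (Or.inr h3)]
      · rw [ih3, colOf_gs_same hsX (by omega) hbc, colOf_gs_same hs hbrn hbc,
          hocol, colOf_getD hbrn]
    · rw [if_neg hpos, if_neg hpos]
      exact ⟨hs, fun r c' _ _ _ => rfl, rfl⟩


-- ---------- filter facts for the gravity swap ----------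
theorem NZ_cons (x : Int) (l : List Int) :
    NZ (x :: l) = if x ≠ 0 then x :: NZ l else NZ l := by
  unfold NZ
  by_cases hx : x ≠ 0
  · rw [if_pos hx, List.filter_cons_of_pos (by simpa using hx)]
  · rw [if_neg hx, List.filter_cons_of_neg (by simpa using hx)]

theorem NZ_set_first (x : Int) (hx : x ≠ 0) : ∀ (k : Nat) (rest : List Int),
    k < rest.length → (∀ i, i < k → rest.getD i 0 = 0) → rest.getD k 0 = 0 →
    NZ (rest.set k x) = x :: NZ rest := by
  intro k
  induction k with
  | zero =>
    intro rest hk hall h0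
    cases rest with
    | nil => simp at hk
    | cons y t =>
      have hy : y = 0 := by simpa using h0
      subst hy
      rw [List.set_cons_zero, NZ_cons, NZ_cons, if_pos hx, if_neg (by simp)]
  | succ k ih =>
    intro rest hk hall h0
    cases rest with
    | nil => simp at hk
    | cons y t =>
      have hy : y = 0 := by simpa using hall 0 (by omega)
      subst hy
      rw [List.set_cons_succ, NZ_cons, NZ_cons, if_neg (by simp), if_neg (by simp)]
      exact ih t (by simpa using hk) (fun i hi => by simpa using hall (i + 1) (by omega))
        (by simpa using h0)

theorem NZ_swap : ∀ (j : Nat) (col : List Int) (m : Nat), j < m → m < col.length →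
    col.getD m 0 = 0 → (∀ i, j < i → i < m → col.getD i 0 = 0) → col.getD j 0 ≠ 0 →
    NZ ((col.set j 0).set m (col.getD j 0)) = NZ col := by
  intro j
  induction j with
  | zero =>
    intro col m hjm hm h0 hbet hj
    cases col with
    | nil => simp at hm
    | cons y t =>
      have hyd : y ≠ 0 := by simpa using hj
      obtain ⟨m', rfl⟩ : ∃ m', m = m' + 1 := ⟨m - 1, by omega⟩
      rw [List.getD_cons_zero, List.set_cons_zero, List.set_cons_succ, NZ_cons, NZ_cons,
        if_pos hyd, if_neg (by simp)]
      rw [NZ_set_first y hyd m' t (by simpa using hm)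
        (fun i hi => by simpa using hbet (i + 1) (by omega) (by omega))
        (by simpa using h0)]
  | succ j ih =>
    intro col m hjm hm h0 hbet hj
    cases col with
    | nil => simp at hm
    | cons y t =>
      obtain ⟨m', rfl⟩ : ∃ m', m = m' + 1 := ⟨m - 1, by omega⟩
      rw [List.getD_cons_succ, List.set_cons_succ, List.set_cons_succ, NZ_cons, NZ_cons]
      rw [ih t m' (by omega) (by simpa using hm) (by simpa using h0)
        (fun i h1 h2 => by simpa using hbet (i + 1) (by omega) (by omega))
        (by simpa using hj)]

-- ---------- the column loop compacts: zeros on top, survivors below ----------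
theorem gravLoopC_spec (n : Nat) : ∀ (o : Nat) (col : List Int), col.length = n → o < n →
    (∀ i, o < i → i < n → col.getD i 0 ≠ 0) →
    gravLoopC col o = List.replicate (n - (NZ col).length) 0 ++ NZ col := by
  intro o
  induction o with
  | zero =>
    intro col hlen hon hall
    cases col with
    | nil => simp at hlen; omega
    | cons y t =>
      have htz : ∀ x ∈ t, x ≠ 0 := by
        intro x hx
        obtain ⟨i, hi, rfl⟩ := List.mem_iff_getElem.mp hx
        have := hall (i + 1) (by omega) (by simp at hlen; omega)
        rwa [List.getD_cons_succ, List.getD_eq_getElem _ _ hi] at this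
      have hNZt : NZ t = t := List.filter_eq_self.mpr (fun x hx => by
        simpa using htz x hx)
      have hlt : t.length = n - 1 := by simp at hlen; omega
      show y :: t = _
      rw [NZ_cons]
      by_cases hy : y ≠ 0
      · rw [if_pos hy, hNZt]
        have : n - (y :: t).length = 0 := by simp; omega
        simp only [List.length_cons, hlt]
        rw [show n - (n - 1 + 1) = 0 by omega]
        simp
      · rw [if_neg hy, hNZt, hlt, show n - (n - 1) = 1 by omega]
        have hy0 : y = 0 := by simpa using hy
        rw [hy0]
        simp
  | succ o ih =>
    intro col hlen hon hall
    rw [gravLoopC]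
    by_cases hz : col.getD (o + 1) 0 = 0
    · rw [if_pos hz]
      rcases scanUpA_spec (fun i => col.getD i 0) ((o : Int) + 1) (by omega) with
        ⟨h1, h2⟩ | ⟨h1, h2, h3, h4⟩
      · rw [h1, if_neg (by omega)]
        -- everything at or below o+1 is zero, everything above is nonzero
        have hzero : ∀ i : Nat, i ≤ o + 1 → col.getD i 0 = 0 := fun i hi => h2 i (by omega)
        have htake : col.take (o + 2) = List.replicate (o + 2) 0 := by
          have hlen2 : (col.take (o + 2)).length = o + 2 := by
            rw [List.length_take]; omega
          have hmem : ∀ b ∈ col.take (o + 2), b = (0 : Int) := by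
            intro x hx
            obtain ⟨i, hi, rfl⟩ := List.mem_iff_getElem.mp hx
            rw [List.getElem_take]
            have := hzero i (by rw [List.length_take] at hi; omega)
            rwa [List.getD_eq_getElem _ _ (by omega)] at this
          have h := List.eq_replicate_of_mem hmem
          rwa [hlen2] at h
        have hdrop : ∀ x ∈ col.drop (o + 2), x ≠ 0 := by
          intro x hx
          obtain ⟨i, hi, rfl⟩ := List.mem_iff_getElem.mp hx
          rw [List.getElem_drop]
          have := hall (o + 2 + i) (by omega) (by rw [List.length_drop] at hi; omega)
          rwa [List.getD_eq_getElem _ _ (by rw [List.length_drop] at hi; omega)] at this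
        have hsplit : col = List.replicate (o + 2) 0 ++ col.drop (o + 2) := by
          rw [← htake, List.take_append_drop]
        have ha : NZ (List.replicate (o + 2) (0 : Int)) = [] := by
          unfold NZ
          refine List.filter_eq_nil_iff.mpr ?_
          intro x hx
          rw [List.eq_of_mem_replicate hx]
          simp
        have hb : NZ (col.drop (o + 2)) = col.drop (o + 2) := by
          unfold NZ
          exact List.filter_eq_self.mpr (fun x hx => by simpa using hdrop x hx)
        have hNZ : NZ col = col.drop (o + 2) := by
          conv_lhs => rw [hsplit]
          unfold NZ
          rw [List.filter_append]
          unfold NZ at ha hb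
          rw [ha, hb, List.nil_append]
        rw [hNZ]
        have hdl : (col.drop (o + 2)).length = n - (o + 2) := by rw [List.length_drop, hlen]
        rw [hdl, show n - (n - (o + 2)) = o + 2 by omega]
        conv_lhs => rw [hsplit]
      · rw [if_pos h1]
        set j := scanUpA (fun i => col.getD i 0) ((o : Int) + 1) with hj
        have hjo : j.toNat ≤ o := by
          have : j ≠ (o : Int) + 1 := by
            intro hx
            rw [hx, show ((o : Int) + 1).toNat = o + 1 by omega] at h3
            exact h3 hz
          omega
        have hcol' : ((col.set j.toNat (col.getD (o + 1) 0)).set (o + 1)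
            (col.getD j.toNat 0)).length = n := by simp [hlen]
        have hNZeq : NZ ((col.set j.toNat (col.getD (o + 1) 0)).set (o + 1)
            (col.getD j.toNat 0)) = NZ col := by
          rw [hz]
          exact NZ_swap j.toNat col (o + 1) (by omega) (by omega) hz
            (fun i h1i h2i => h4 i (by omega) (by omega)) h3
        rw [ih _ hcol' (by omega) ?_, hNZeq]
        intro i hio hin
        by_cases hio1 : i = o + 1
        · subst hio1
          rw [getD_set_self _ _ _ _ (by simp; omega)]
          exact h3
        · rw [getD_set_ne _ _ _ _ _ (by omega), getD_set_ne _ _ _ _ _ (by omega)]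
          exact hall i (by omega) hin
    · rw [if_neg hz, if_pos (by omega)]
      rw [show ((o : Int) + 1).toNat = o + 1 by omega, List.set_set,
        List.getD_eq_getElem _ _ (by omega), List.set_getElem_self]
      refine ih col hlen (by omega) ?_
      intro i h1 h2
      by_cases hio : i = o + 1
      · subst hio; exact hz
      · exact hall i (by omega) h2


-- ---------- grid-level gravity, A ----------
def gravSem (n : Nat) (col : List Int) : List Int :=
  List.replicate (n - (NZ col).length) 0 ++ NZ col

theorem gravA_spec (g : List (List Int)) (n : Nat) (hs : ShapeG g n) (hn : 1 ≤ n) :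
    ShapeG (gravA g n) n ∧
    ∀ c, c < n → colOf (gravA g n) n c = gravSem n (colOf g n c) := by
  unfold gravA
  have main := foldl_range_inv n (fun g b_c => gravColA g b_c (n - 1)) (fun k G =>
    ShapeG G n ∧ ∀ c, c < n →
      (c < k → colOf G n c = gravSem n (colOf g n c)) ∧
      (k ≤ c → colOf G n c = colOf g n c)) g
    ⟨hs, fun c _ => ⟨fun h => absurd h (by omega), fun _ => rfl⟩⟩ ?_
  · exact ⟨main.1, fun c hc => (main.2 c hc).1 hc⟩
  · intro k G hk hG
    simp only
    obtain ⟨c1, c2, c3⟩ := gravColA_comm n k hk (n - 1) G (by omega) hG.1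
    refine ⟨c1, ?_⟩
    intro c hc
    constructor
    · intro hck
      by_cases hckk : c = k
      · subst hckk
        rw [c3, (hG.2 c hc).2 le_rfl, gravLoopC_spec n (n - 1) (colOf g n c)
          (colOf_length g n c) (by omega) (fun i h1 h2 => absurd h1 (by omega))]
        rfl
      · have hlt : c < k := by omega
        rw [show colOf (gravColA G k (n - 1)) n c = colOf G n c from
          List.map_congr_left (fun i hi => c2 i c (by simp at hi; omega) hc hckk)]
        exact (hG.2 c hc).1 hlt
    · intro hck
      have hckk : c ≠ k := by omega
      rw [show colOf (gravColA G k (n - 1)) n c = colOf G n c from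
        List.map_congr_left (fun i hi => c2 i c (by simp at hi; omega) hc hckk)]
      exact (hG.2 c hc).2 (by omega)

-- ---------- grid-level gravity, B ----------
theorem gravB_spec (g1 : List (List Int)) (n : Nat) (hs : ShapeG g1 n) :
    ShapeG ((List.range n).foldl (fun g c =>
      let keep := ((List.range n).map (fun r => gg 0 g r c)).filter (fun x => x ≠ 0)
      let z := n - keep.length
      (List.range n).foldl (fun g r => gs g r c (if r < z then 0 else keep.getD (r - z) 0)) g)
      g1) n ∧
    ∀ c, c < n → colOf ((List.range n).foldl (fun g c =>
      let keep := ((List.range n).map (fun r => gg 0 g r c)).filter (fun x => x ≠ 0)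
      let z := n - keep.length
      (List.range n).foldl (fun g r => gs g r c (if r < z then 0 else keep.getD (r - z) 0)) g)
      g1) n c = gravSem n (colOf g1 n c) := by
  have main := foldl_range_inv n (fun g c =>
    let keep := ((List.range n).map (fun r => gg 0 g r c)).filter (fun x => x ≠ 0)
    let z := n - keep.length
    (List.range n).foldl (fun g r => gs g r c (if r < z then 0 else keep.getD (r - z) 0)) g)
    (fun k G =>
      ShapeG G n ∧ ∀ c, c < n →
        (c < k → colOf G n c = gravSem n (colOf g1 n c)) ∧
        (k ≤ c → colOf G n c = colOf g1 n c)) g1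
    ⟨hs, fun c _ => ⟨fun h => absurd h (by omega), fun _ => rfl⟩⟩ ?_
  · exact ⟨main.1, fun c hc => (main.2 c hc).1 hc⟩
  · intro k G hk hG
    simp only
    have hkeep : ((List.range n).map (fun r => gg 0 G r k)).filter (fun x => x ≠ 0) =
        NZ (colOf g1 n k) := by
      show NZ (colOf G n k) = NZ (colOf g1 n k)
      rw [(hG.2 k hk).2 le_rfl]
    rw [hkeep]
    obtain ⟨w1, w2⟩ := writeCol_spec G n k
      (fun r => if r < n - (NZ (colOf g1 n k)).length then 0
        else (NZ (colOf g1 n k)).getD (r - (n - (NZ (colOf g1 n k)).length)) 0) hG.1 hk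
    refine ⟨w1, ?_⟩
    intro c hc
    have hcols : ∀ c', c' < n → colOf ((List.range n).foldl (fun G r => gs G r k
        (if r < n - (NZ (colOf g1 n k)).length then 0
         else (NZ (colOf g1 n k)).getD (r - (n - (NZ (colOf g1 n k)).length)) 0)) G) n c' =
        if c' = k then gravSem n (colOf g1 n k) else colOf G n c' := by
      intro c' hc'
      by_cases hck : c' = k
      · subst hck
        rw [if_pos rfl]
        have hnzlen : (NZ (colOf g1 n c')).length ≤ n := by
          have := List.length_filter_le (fun x => decide (x ≠ 0)) (colOf g1 n c')
          rw [colOf_length] at this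
          exact le_trans this (le_refl n)
        apply List.ext_getElem
        · rw [colOf_length, gravSem, List.length_append, List.length_replicate]
          omega
        · intro i h1 h2
          rw [colOf_length] at h1
          rw [colOf_getElem _ _ _ _ (by rwa [colOf_length])]
          rw [w2 i c' h1 hc', if_pos rfl]
          by_cases hi : i < n - (NZ (colOf g1 n c')).length
          · rw [if_pos hi]
            unfold gravSem
            rw [List.getElem_append_left (by simp; omega)]
            simp
          · rw [if_neg hi]
            unfold gravSem
            rw [List.getElem_append_right (by simp; omega)]
            rw [List.getD_eq_getElem _ _ (by omega)]
            congr 1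
            simp
      · rw [if_neg hck]
        apply List.map_congr_left
        intro i hi
        rw [w2 i c' (by simp at hi; omega) hc', if_neg hck]
    constructor
    · intro hck
      by_cases hckk : c = k
      · subst hckk
        rw [hcols c hc, if_pos rfl]
      · rw [hcols c hc, if_neg hckk]
        exact (hG.2 c hc).1 (by omega)
    · intro hck
      rw [hcols c hc, if_neg (by omega)]
      exact (hG.2 c hc).2 (by omega)


-- ---------- the two cascade loops agree step by step ----------
theorem destroyed_getD (g : List (List Int)) {n r c : Nat} (hr : r < n) (hc : c < n) :
    gg false ((List.range n).map (fun r => (List.range n).map (fun c => destB g n r c))) r c =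
      destB g n r c := by
  unfold gg
  rw [PySem.List.getD_map_range _ _ _ _ hr, PySem.List.getD_map_range _ _ _ _ hc]

theorem cntB_sum (g : List (List Int)) (n : Nat) :
    (((List.range n).map (fun r => (List.range n).map (fun c => destB g n r c))).map
      (fun row => row.count true)).sum =
    ((List.range n).map (fun r => (List.range n).countP (fun c => destB g n r c))).sum := by
  rw [List.map_map]
  congr 1
  apply List.map_congr_left
  intro r _
  simp only [Function.comp]
  rw [List.count_eq_countP, List.countP_map]
  apply List.countP_congr
  intro c _
  simp

theorem gg_eq_of_colOf {g1 g2 : List (List Int)} {n : Nat}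
    (h : ∀ c, c < n → colOf g1 n c = colOf g2 n c) :
    ∀ r c, r < n → c < n → gg 0 g1 r c = gg 0 g2 r c := by
  intro r c h1 h2
  rw [← colOf_getD h1, ← colOf_getD h1, h c h2]

theorem loop_eq (n : Nat) : ∀ (fuel : Nat) (g : List (List Int)) (result : Int),
    ShapeG g n → loopA n fuel g result = loopB n fuel g result := by
  intro fuel
  induction fuel with
  | zero => intro g result _; rfl
  | succ fuel ih =>
    intro g result hs
    obtain ⟨msh, mcell, mflag⟩ := mark_spec g n
    rw [loopA, loopB]
    simp only
    -- the count B computes, as a sum of per-row countP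
    have hcnt : (((List.range n).map (fun r => (List.range n).map (fun c => destB g n r c))).map
        (fun row => row.count true)).sum =
        ((List.range n).map (fun r => (List.range n).countP (fun c => destB g n r c))).sum :=
      cntB_sum g n
    by_cases hfl : (vertA g n (horizA g n)).1
    · rw [if_pos hfl]
      obtain ⟨r0, c0, hr0, hc0, hd0⟩ := mflag.mp hfl
      have hn : 1 ≤ n := by omega
      -- B's count is nonzero
      have hcne : (((List.range n).map (fun r => (List.range n).map
          (fun c => destB g n r c))).map (fun row => row.count true)).sum ≠ 0 := by
        rw [hcnt]
        intro hzero
        have := List.sum_eq_zero_iff_forall_eq_nat.mp hzero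
          ((List.range n).countP (fun c => destB g n r0 c))
          (List.mem_map_of_mem (by simp [hr0]))
        have := List.countP_eq_zero.mp this c0 (by simp [hc0])
        exact this hd0
      rw [if_neg hcne]
      -- the zeroed grids agree cell by cell
      obtain ⟨zsh, zpt, zcnt⟩ := crushCountA_spec g (vertA g n (horizA g n)).2 n result hs
      obtain ⟨bsh, bpt⟩ := zeroB_spec g n
        ((List.range n).map (fun r => (List.range n).map (fun c => destB g n r c))) hs
      have hzeq : ∀ r c, r < n → c < n →
          gg 0 (crushCountA g (vertA g n (horizA g n)).2 n result).1 r c =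
          gg 0 ((List.range n).foldl (fun G r => (List.range n).foldl (fun G c =>
            if gg false ((List.range n).map (fun r => (List.range n).map
              (fun c => destB g n r c))) r c then gs G r c 0 else G) G) g) r c := by
        intro r c h1 h2
        have hb := bpt r c h1 h2
        rw [destroyed_getD g h1 h2] at hb
        rw [zpt r c h1 h2]
        refine Eq.trans ?_ hb.symm
        by_cases hd : destB g n r c = true
        · rw [if_pos ((mcell r c h1 h2).mpr hd), if_pos hd]
        · rw [if_neg (fun hx => hd ((mcell r c h1 h2).mp hx)), if_neg hd]
      -- hence the post-gravity grids are equal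
      obtain ⟨gash, gacol⟩ := gravA_spec
        (crushCountA g (vertA g n (horizA g n)).2 n result).1 n zsh hn
      obtain ⟨gbsh, gbcol⟩ := gravB_spec ((List.range n).foldl (fun G r =>
        (List.range n).foldl (fun G c =>
          if gg false ((List.range n).map (fun r => (List.range n).map
            (fun c => destB g n r c))) r c then gs G r c 0 else G) G) g) n bsh
      have hgrids : gravA (crushCountA g (vertA g n (horizA g n)).2 n result).1 n =
          (List.range n).foldl (fun g c =>
            let keep := ((List.range n).map (fun r => gg 0 g r c)).filter (fun x => x ≠ 0)
            let z := n - keep.length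
            (List.range n).foldl (fun g r =>
              gs g r c (if r < z then 0 else keep.getD (r - z) 0)) g)
            ((List.range n).foldl (fun G r => (List.range n).foldl (fun G c =>
              if gg false ((List.range n).map (fun r => (List.range n).map
                (fun c => destB g n r c))) r c then gs G r c 0 else G) G) g) := by
        apply grid_ext 0 gash gbsh
        apply gg_eq_of_colOf
        intro c hc
        rw [gacol c hc, gbcol c hc]
        congr 1
        exact List.map_congr_left (fun i hi => hzeq i c (by simp at hi; omega) hc)
      -- and the counters agree
      have hcounts : (crushCountA g (vertA g n (horizA g n)).2 n result).2 =
          result + (((((List.range n).map (fun r => (List.range n).map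
            (fun c => destB g n r c))).map (fun row => row.count true)).sum : Nat) : Int) := by
        rw [zcnt]
        congr 1
        have hNat : ((List.range n).map
            (fun i => rowMarks (vertA g n (horizA g n)).2 n i)).sum =
            (((List.range n).map (fun r => (List.range n).map
              (fun c => destB g n r c))).map (fun row => row.count true)).sum := by
          rw [cntB_sum g n]
          congr 1
          apply List.map_congr_left
          intro i hi
          have hin : i < n := by simpa using hi
          unfold rowMarks
          apply List.countP_congr
          intro c hcm
          have hcn : c < n := by simpa using hcm
          by_cases hd : destB g n i c = true
          · simp [hd, (mcell i c hin hcn).mpr hd]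
          · have hzz : ¬ gg 0 (vertA g n (horizA g n)).2 i c ≠ 0 :=
              fun hx => hd ((mcell i c hin hcn).mp hx)
            simp only [ne_eq, Decidable.not_not] at hzz
            simp [hzz, hd]
        rw [← hNat, Nat.cast_list_sum, List.map_map]
        rfl
      rw [hcounts, hgrids]
      exact ih _ _ gbsh
    · rw [if_neg hfl]
      have hcz : (((List.range n).map (fun r => (List.range n).map
          (fun c => destB g n r c))).map (fun row => row.count true)).sum = 0 := by
        rw [hcnt]
        apply List.sum_eq_zero_iff_forall_eq_nat.mpr
        intro x hx
        obtain ⟨r, hrm, rfl⟩ := List.mem_map.mp hx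
        apply List.countP_eq_zero.mpr
        intro c hcm hd
        exact hfl (mflag.mpr ⟨r, c, by simpa using hrm, by simpa using hcm, hd⟩)
      rw [if_pos hcz]


-- ---------- the initial grids (copy + hammer) coincide ----------
theorem writeRow_spec (G : List (List Int)) (n k : Nat) (w : Nat → Int) (hs : ShapeG G n)
    (hk : k < n) :
    ShapeG ((List.range n).foldl (fun G c => gs G k c (w c)) G) n ∧
    ∀ r c', r < n → c' < n →
      gg 0 ((List.range n).foldl (fun G c => gs G k c (w c)) G) r c' =
        if r = k then w c' else gg 0 G r c' := by
  have main := foldl_range_inv n (fun G c => gs G k c (w c)) (fun j G' =>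
    ShapeG G' n ∧
    ∀ r c', r < n → c' < n →
      gg 0 G' r c' = if r = k ∧ c' < j then w c' else gg 0 G r c') G
    ⟨hs, by intro r c' h1 h2; rw [if_neg (by omega)]⟩ ?_
  · refine ⟨main.1, ?_⟩
    intro r c' h1 h2
    rw [main.2 r c' h1 h2]
    by_cases hck : r = k
    · rw [if_pos ⟨hck, h2⟩, if_pos hck]
    · rw [if_neg (fun hh => hck hh.1), if_neg hck]
  · intro j G' hj hG'
    refine ⟨shape_gs hG'.1 _ _ _, ?_⟩
    intro r c' h1 h2
    by_cases hat : r = k ∧ c' = j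
    · rw [hat.1, hat.2, gg_gs_same _ hG'.1 hk hj, if_pos ⟨rfl, by omega⟩]
    · have hne : r ≠ k ∨ c' ≠ j := by tauto
      rw [gg_gs_ne _ _ _ (by tauto), hG'.2 r c' h1 h2]
      congr 1
      simp only [eq_iff_iff]
      constructor
      · rintro ⟨ha, hb⟩; exact ⟨ha, by omega⟩
      · rintro ⟨ha, hb⟩
        refine ⟨ha, ?_⟩
        rcases hne with hne | hne
        · exact absurd ha hne
        · omega

theorem fillA_spec (board : List (List Int)) (n : Nat) :
    ShapeG ((List.range n).foldl (fun g rr =>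
      (List.range n).foldl (fun g cc => gs g rr cc (gg 0 board rr cc)) g)
      (List.replicate n (List.replicate n 0))) n ∧
    ∀ r c, r < n → c < n →
      gg 0 ((List.range n).foldl (fun g rr =>
        (List.range n).foldl (fun g cc => gs g rr cc (gg 0 board rr cc)) g)
        (List.replicate n (List.replicate n 0))) r c = gg 0 board r c := by
  have main := foldl_range_inv n (fun g rr =>
    (List.range n).foldl (fun g cc => gs g rr cc (gg 0 board rr cc)) g) (fun j G =>
      ShapeG G n ∧
      ∀ r c, r < n → c < n →
        gg 0 G r c = if r < j then gg 0 board r c else 0)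
    (List.replicate n (List.replicate n 0))
    ⟨shape_replicate n 0, by
      intro r c h1 h2
      rw [if_neg (by omega), gg_replicate 0 0 h1 h2]⟩ ?_
  · refine ⟨main.1, ?_⟩
    intro r c h1 h2
    rw [main.2 r c h1 h2, if_pos h1]
  · intro j G hj hG
    simp only
    obtain ⟨w1, w2⟩ := writeRow_spec G n j (fun cc => gg 0 board j cc) hG.1 hj
    refine ⟨w1, ?_⟩
    intro r c h1 h2
    rw [w2 r c h1 h2]
    by_cases hrj : r = j
    · rw [if_pos hrj, if_pos (by omega), hrj]
    · rw [if_neg hrj, hG.2 r c h1 h2]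
      congr 1
      simp only [eq_iff_iff]
      omega

theorem initB_gg (board : List (List Int)) (n : Nat) {r c : Nat} (hr : r < n) (hc : c < n) :
    gg 0 ((List.range n).map (fun r => (board.getD r []).take n)) r c = gg 0 board r c := by
  unfold gg
  rw [PySem.List.getD_map_range _ _ _ _ hr]
  rw [List.getD_eq_getElem?_getD, List.getElem?_take, if_pos hc, ← List.getD_eq_getElem?_getD]

theorem initB_shape (board : List (List Int)) (n : Nat)
    (hrows : ∀ r, r < n → n ≤ (board.getD r []).length) :
    ShapeG ((List.range n).map (fun r => (board.getD r []).take n)) n := by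
  refine ⟨by simp, ?_⟩
  intro row hrow
  obtain ⟨r, hrm, rfl⟩ := List.mem_map.mp hrow
  have hrn : r < n := by simpa using hrm
  rw [List.length_take]
  have := hrows r hrn
  omega

theorem hammerA_shape {g : List (List Int)} {n : Nat} (hs : ShapeG g n) :
    ∀ hr hc, ShapeG (hammerA g hr hc) n := by
  intro hr
  induction hr generalizing g with
  | zero => intro hc; exact hs
  | succ h ih => intro hc; exact ih (shape_gs hs _ _ _) hc

-- the two copies of the board (A: write into a zero grid; B: map-and-truncate) coincide
theorem init_eq (board : List (List Int)) (n : Nat)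
    (hrows : ∀ r, r < n → n ≤ (board.getD r []).length) :
    (List.range n).map (fun r => (board.getD r []).take n) =
    (List.range n).foldl (fun g rr =>
      (List.range n).foldl (fun g cc => gs g rr cc (gg 0 board rr cc)) g)
      (List.replicate n (List.replicate n 0)) := by
  obtain ⟨fsh, fpt⟩ := fillA_spec board n
  apply grid_ext 0 (initB_shape board n hrows) fsh
  intro r c h1 h2
  rw [fpt r c h1 h2, initB_gg board n h1 h2]
-- ===== VERDICT (by name: the statement is the Claim_ definition above) =====
theorem solve_spec : Claim_equal_solve := by
  intro hammer board length _ hpre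
  obtain ⟨hl1, hl2, hh0a, hh0b, hh1a, hh1b, hbl, hrl⟩ := hpre
  unfold Spec_solve
  have hrows : ∀ r, r < length.toNat → length.toNat ≤ (board.getD r []).length := by
    intro r hrn
    have hmem : board.getD r [] ∈ board.take length.toNat := by
      rw [List.getD_eq_getElem _ _ (by omega)]
      have hrt : r < (board.take length.toNat).length := by simp; omega
      have hm := List.getElem_mem hrt
      rwa [List.getElem_take] at hm
    exact hrl _ hmem
  simp only [solve, solve_alt]
  rw [init_eq board length.toNat hrows]
  exact loop_eq length.toNat _ _ _
    (shape_gs (hammerA_shape (fillA_spec board length.toNat).1 _ _) _ _ _)
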